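-- pv_equiv track=rewrite | github.com/grapheneaffiliate/h4-polytopic-attention | agent_zero/arc_custom_solvers.py | solve_5ad4f10b
-- ===== SOURCE A (Python) =====
-- from collections import Counter, deque, defaultdict
--
-- def solve_5ad4f10b(grid):
--     """Large block of one color forms a 3x3 arrangement of sub-blocks.
--     Output: 3x3 grid where filled sub-blocks get the scatter color, empty get 0."""
--     h, w = len(grid), len(grid[0])
--     colors = set(grid[r][c] for r in range(h) for c in range(w) if grid[r][c] != 0)
--     best_block_color = None
--     best_cluster_size = 0
--     for color in colors:
--         visited = set()
--         for r in range(h):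
--             for c in range(w):
--                 if grid[r][c] == color and (r, c) not in visited:
--                     cluster_size = 0
--                     q = deque([(r, c)])
--                     visited.add((r, c))
--                     while q:
--                         cr, cc = q.popleft()
--                         cluster_size += 1
--                         for dr, dc in [(-1, 0), (1, 0), (0, -1), (0, 1)]:
--                             nr, nc = cr + dr, cc + dc
--                             if 0 <= nr < h and 0 <= nc < w and (nr, nc) not in visited and grid[nr][nc] == color:
--                                 visited.add((nr, nc))
--                                 q.append((nr, nc))
--                     if cluster_size > best_cluster_size:
--                         best_cluster_size = cluster_size
--                         best_block_color = color
--     scatter_color = [c for c in colors if c != best_block_color][0]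
--     block_cells = [(r, c) for r in range(h) for c in range(w) if grid[r][c] == best_block_color]
--     min_r = min(r for r, c in block_cells)
--     max_r = max(r for r, c in block_cells)
--     min_c = min(c for r, c in block_cells)
--     max_c = max(c for r, c in block_cells)
--     sub_h = (max_r - min_r + 1) // 3
--     sub_w = (max_c - min_c + 1) // 3
--     result = [[0] * 3 for _ in range(3)]
--     for sr in range(3):
--         for sc in range(3):
--             r_start = min_r + sr * sub_h
--             c_start = min_c + sc * sub_w
--             filled = all(grid[r_start + dr][c_start + dc] == best_block_color
--                          for dr in range(sub_h) for dc in range(sub_w))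
--             if filled:
--                 result[sr][sc] = scatter_color
--     return result
-- ===== SOURCE B (Python) =====
-- def solve_5ad4f10b(grid):
--     """Alternative: one pass over the grid; each new component is grown by iterated
--     set dilation to a fixed point (no BFS queue, no per-color rescan); each color's
--     largest size is kept in a dict; bounding box from occupied row/column lists."""
--     h, w = len(grid), len(grid[0])
--     colors = set(grid[r][c] for r in range(h) for c in range(w) if grid[r][c] != 0)
--     seen = set()
--     best = {}  # color -> size of its largest component found so far
--     for r in range(h):
--         for c in range(w):
--             v = grid[r][c]
--             if v != 0 and (r, c) not in seen:
--                 comp = {(r, c)}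
--                 while True:
--                     grown = comp | {(cr + dr, cc + dc)
--                                     for (cr, cc) in comp
--                                     for (dr, dc) in ((-1, 0), (1, 0), (0, -1), (0, 1))
--                                     if 0 <= cr + dr < h and 0 <= cc + dc < w
--                                     and grid[cr + dr][cc + dc] == v}
--                     if grown == comp:
--                         break
--                     comp = grown
--                 seen |= comp
--                 if len(comp) > best.get(v, 0):
--                     best[v] = len(comp)
--     best_block_color = max(colors, key=lambda col: best[col])
--     scatter_color = next(col for col in colors if col != best_block_color)
--     block_rows = [r for r in range(h) if any(grid[r][c] == best_block_color for c in range(w))]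
--     block_cols = [c for c in range(w) if any(grid[r][c] == best_block_color for r in range(h))]
--     min_r, max_r = block_rows[0], block_rows[-1]
--     min_c, max_c = block_cols[0], block_cols[-1]
--     sub_h = (max_r - min_r + 1) // 3
--     sub_w = (max_c - min_c + 1) // 3
--     return [[scatter_color if all(grid[min_r + sr * sub_h + dr][min_c + sc * sub_w + dc] == best_block_color
--                                   for dr in range(sub_h) for dc in range(sub_w)) else 0
--              for sc in range(3)]
--             for sr in range(3)]
-- ===== Notes on version B (the rewrite author's own statement) =====
-- stated objective: faster
-- what changed: A rescans the whole grid once per distinct color with a fresh visited set and a deque BFS; B makes a single pass over the grid, grows each newly met component by iterated set dilation to a fixed point (no queue), keeps each color's largest-component size in a dict, selects the block color with max(colors, key=...), and reads the bounding box off the occupied row/column lists instead of a cell-pair list.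
import Mathlib
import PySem

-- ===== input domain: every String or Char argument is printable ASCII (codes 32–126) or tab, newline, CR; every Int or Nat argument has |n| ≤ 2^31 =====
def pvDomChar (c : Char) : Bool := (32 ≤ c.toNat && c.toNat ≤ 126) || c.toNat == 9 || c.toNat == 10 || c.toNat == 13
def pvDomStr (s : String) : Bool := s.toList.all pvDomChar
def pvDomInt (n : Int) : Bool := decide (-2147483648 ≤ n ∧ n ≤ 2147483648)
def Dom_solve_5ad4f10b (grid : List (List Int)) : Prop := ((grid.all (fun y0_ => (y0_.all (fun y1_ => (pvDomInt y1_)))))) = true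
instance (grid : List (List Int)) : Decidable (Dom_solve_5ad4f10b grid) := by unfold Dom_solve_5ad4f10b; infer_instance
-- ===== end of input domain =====

-- B replaces A's one-deque-BFS-per-color search by a single pass over the grid that
-- grows each newly met component by iterated set dilation to a fixed point (per-color
-- largest sizes kept in a dict) and reads the bounding box off the occupied
-- row/column lists; equivalence is proved on Pre_ (see its comment).

-- ===== PORT A =====
-- shared helpers: both Pythons contain the identical bounds-checked accesses,
-- grid scanning order and set(colors) construction, so those are shared definitions.

-- grid[r][c]; every use in either program is bounds-checked (or guarded by Pre_),
-- so the defaults are never taken on admitted inputs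
def gcell (grid : List (List Int)) (r c : Int) : Int :=
  PySem.List.pyGetD (PySem.List.pyGetD grid r []) c 0

-- [(r, c) for r in range(h) for c in range(w)]
def allCells (h w : Int) : List (Int × Int) :=
  (PySem.List.pyRange 0 h 1).flatMap (fun r => (PySem.List.pyRange 0 w 1).map (fun c => (r, c)))

-- the four neighbour directions [(-1,0),(1,0),(0,-1),(0,1)]
def dirs : List (Int × Int) := [(-1, 0), (1, 0), (0, -1), (0, 1)]

-- one direction step of A's inner BFS loop body
def bfsRelax (grid : List (List Int)) (h w color cr cc : Int)
    (st : PySem.Set (Int × Int) × List (Int × Int)) (d : Int × Int) :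
    PySem.Set (Int × Int) × List (Int × Int) :=
  let nr := cr + d.1
  let nc := cc + d.2
  if 0 ≤ nr ∧ nr < h ∧ 0 ≤ nc ∧ nc < w ∧ (nr, nc) ∉ st.1 ∧ gcell grid nr nc = color then
    (PySem.Set.add st.1 (nr, nc), st.2 ++ [(nr, nc)])
  else st

-- termination measure helpers for the loops of both ports
def unvis (h w : Int) (vis : PySem.Set (Int × Int)) : Nat :=
  ((allCells h w).filter (fun p => decide (p ∉ vis))).length

lemma mem_allCells (h w : Int) (p : Int × Int) :
    p ∈ allCells h w ↔ 0 ≤ p.1 ∧ p.1 < h ∧ 0 ≤ p.2 ∧ p.2 < w := by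
  obtain ⟨r, c⟩ := p
  simp [allCells, PySem.List.mem_pyRange_one]
  tauto

lemma nodup_allCells (h w : Int) : (allCells h w).Nodup := by
  unfold allCells
  rw [List.nodup_flatMap]
  constructor
  · intro r _
    exact (PySem.List.nodup_pyRange_one 0 w).map (by intro a b hab; simpa using hab)
  · refine List.Pairwise.imp ?_ (PySem.List.pairwise_lt_pyRange_one 0 h)
    intro r₁ r₂ hlt p hp₁ hp₂
    simp at hp₁ hp₂
    obtain ⟨c₁, _, hc₁⟩ := hp₁; obtain ⟨c₂, _, hc₂⟩ := hp₂
    rw [← hc₂] at hc₁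
    simp [Prod.ext_iff] at hc₁
    omega

lemma unvis_append (h w : Int) (vis : PySem.Set (Int × Int)) (p : Int × Int)
    (hp : p ∈ allCells h w) (hnp : p ∉ vis) :
    unvis h w (vis ++ [p]) + 1 = unvis h w vis := by
  unfold unvis
  have h1 : ((allCells h w).filter (fun q => decide (q ∉ vis ++ [p])))
      = ((allCells h w).filter (fun q => decide (q ∉ vis))).filter (fun q => q != p) := by
    rw [List.filter_filter]
    apply List.filter_congr
    intro q _
    by_cases hqv : q ∈ vis <;> by_cases hqp : q = p <;> simp [hqv, hqp]
  have h2 : p ∈ (allCells h w).filter (fun q => decide (q ∉ vis)) := by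
    simp [hp, hnp]
  have h3 : ((allCells h w).filter (fun q => decide (q ∉ vis))).Nodup :=
    (nodup_allCells h w).filter _
  rw [h1, ← List.Nodup.erase_eq_filter h3 p, List.length_erase_of_mem h2]
  have := List.length_pos_of_mem h2
  omega

lemma relax_measure (grid : List (List Int)) (h w color cr cc : Int)
    (st : PySem.Set (Int × Int) × List (Int × Int)) (d : Int × Int) :
    2 * unvis h w (bfsRelax grid h w color cr cc st d).1
      + (bfsRelax grid h w color cr cc st d).2.length
    ≤ 2 * unvis h w st.1 + st.2.length := by
  unfold bfsRelax
  simp only []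
  split_ifs with hcond
  · obtain ⟨h1, h2, h3, h4, h5, h6⟩ := hcond
    have hadd : PySem.Set.add st.1 (cr + d.1, cc + d.2) = st.1 ++ [(cr + d.1, cc + d.2)] := by
      simp [PySem.Set.add, PySem.Set.contains]; exact h5
    have hp : (cr + d.1, cc + d.2) ∈ allCells h w := by
      rw [mem_allCells]; exact ⟨h1, h2, h3, h4⟩
    have := unvis_append h w st.1 (cr + d.1, cc + d.2) hp h5
    simp only [hadd, List.length_append, List.length_cons, List.length_nil]
    omega
  · exact le_refl _

lemma relax_fold_measure (grid : List (List Int)) (h w color cr cc : Int)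
    (ds : List (Int × Int)) (st : PySem.Set (Int × Int) × List (Int × Int)) :
    2 * unvis h w (ds.foldl (bfsRelax grid h w color cr cc) st).1
      + (ds.foldl (bfsRelax grid h w color cr cc) st).2.length
    ≤ 2 * unvis h w st.1 + st.2.length := by
  induction ds generalizing st with
  | nil => simp
  | cons d ds ih =>
      exact le_trans (ih _) (relax_measure grid h w color cr cc st d)

-- A's inner `while q:` BFS loop over a deque
def bfsLoop (grid : List (List Int)) (h w color : Int) :
    List (Int × Int) → PySem.Set (Int × Int) → Int → PySem.Set (Int × Int) × Int
  | [], vis, size => (vis, size)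
  | cell :: qt, vis, size =>
      let st := dirs.foldl (bfsRelax grid h w color cell.1 cell.2) (vis, qt)
      bfsLoop grid h w color st.2 st.1 (size + 1)
termination_by q vis _ => 2 * unvis h w vis + q.length
decreasing_by
  have := relax_fold_measure grid h w color cell.1 cell.2 dirs (vis, qt)
  simp only [List.length_cons] at this ⊢
  omega

-- Both Pythons build and ITERATE the same set of colours, and the tie-breaking and
-- scatter choice depend on that iteration order, so set(...) is hand-ported exactly:
-- CPython 3.11 setobject.c (open addressing, LINEAR_PROBES = 9, PERTURB_SHIFT = 5,
-- growth at fill*5 >= mask*3).  Exact on this file's domain: int hash = the value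
-- itself (hash(-1) = -2), valid for |n| <= 2^31 as Dom_ guarantees.
def pyIntHash (n : Int) : Int := if n = -1 then -2 else n

def uhash (n : Int) : Nat := ((pyIntHash n).emod 18446744073709551616).toNat

-- scan the probe window i, i+1, …: some (true, j) = first free slot, some (false, j) = key found
def scanSlots (table : List (Option Int)) (key : Int) : Nat → Nat → Option (Bool × Nat)
  | _, 0 => none
  | i, k+1 =>
    match table.getD i none with
    | none => some (true, i)
    | some x => if x = key then some (false, i) else scanSlots table key (i+1) k

-- set_add_entry / set_insert_clean probe loop; the fuel guard only makes it total —
-- with load factor < 3/5 a free slot is always found long before the fuel runs out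
def addLoop (key : Int) (table : List (Option Int)) (mask : Nat) :
    Nat → Nat → Nat → List (Option Int)
  | _, _, 0 => table ++ [some key]
  | i, perturb, fuel+1 =>
    let probes := if i + 9 ≤ mask then 9 else 0
    match scanSlots table key i (probes + 1) with
    | some (true, j) => table.set j (some key)
    | some (false, _) => table
    | none =>
      let perturb' := perturb >>> 5
      addLoop key table mask ((i * 5 + 1 + perturb') % (mask + 1)) perturb' fuel

def growSize : Nat → Nat → Nat → Nat
  | s, _, 0 => s
  | s, m, f+1 => if s ≤ m then growSize (s * 2) m f else s

def setAddPy (st : List (Option Int) × Nat) (x : Int) : List (Option Int) × Nat :=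
  let size := st.1.length
  let t' := addLoop x st.1 (size - 1) (uhash x % size) (uhash x) (size * size + 64)
  if t' = st.1 then st
  else
    let fill := st.2 + 1
    if fill * 5 ≥ (size - 1) * 3 then
      let minused := if fill > 50000 then fill * 2 else fill * 4
      let ns := growSize 8 minused 64
      ((t'.filterMap id).foldl
        (fun tb k => addLoop k tb (ns - 1) (uhash k % ns) (uhash k) (ns * ns + 64))
        (List.replicate ns none), fill)
    else (t', fill)

-- list(set(xs)) in CPython's iteration order
def pySetOrder (xs : List Int) : List Int :=
  ((xs.foldl setAddPy (List.replicate 8 none, 0)).1).filterMap id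

-- the generator feeding the set: nonzero colours in reading order
def colorSeq (grid : List (List Int)) (h w : Int) : List Int :=
  (PySem.List.pyRange 0 h 1).flatMap (fun r =>
    (PySem.List.pyRange 0 w 1).filterMap (fun c =>
      if gcell grid r c ≠ 0 then some (gcell grid r c) else none))

-- set(grid[r][c] for r in range(h) for c in range(w) if grid[r][c] != 0), in iteration order
def colorsList (grid : List (List Int)) (h w : Int) : List Int :=
  pySetOrder (colorSeq grid h w)

-- A's per-cluster step inside the per-color scan (state: visited × (best color?, best size))
def stepA (grid : List (List Int)) (h w color : Int)
    (st : PySem.Set (Int × Int) × (Option Int × Int)) (p : Int × Int) :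
    PySem.Set (Int × Int) × (Option Int × Int) :=
  if gcell grid p.1 p.2 = color ∧ p ∉ st.1 then
    let res := bfsLoop grid h w color [p] (PySem.Set.add st.1 p) 0
    if res.2 > st.2.2 then (res.1, (some color, res.2)) else (res.1, st.2)
  else st

-- one iteration of A's `for color in colors:` loop (fresh visited set per color)
def colorScan (grid : List (List Int)) (h w : Int) (bb : Option Int × Int) (color : Int) :
    Option Int × Int :=
  ((PySem.List.pyRange 0 h 1).foldl (fun st r =>
    (PySem.List.pyRange 0 w 1).foldl (fun st c => stepA grid h w color st (r, c)) st)
    ((PySem.Set.empty : PySem.Set (Int × Int)), bb)).2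

def solve_5ad4f10b (grid : List (List Int)) : List (List Int) :=
  let h : Int := grid.length
  let w : Int := (PySem.List.pyGetD grid 0 []).length
  let colors := colorsList grid h w
  let bb := colors.foldl (colorScan grid h w) (none, 0)
  let best_block_color : Option Int := bb.1
  -- [c for c in colors if c != best_block_color][0]  (IndexError excluded by Pre_)
  let scatter_color : Int :=
    PySem.List.pyGetD (colors.filter (fun c => decide (some c ≠ best_block_color))) 0 0
  let block_cells : List (Int × Int) :=
    (PySem.List.pyRange 0 h 1).flatMap (fun r =>
      (PySem.List.pyRange 0 w 1).filterMap (fun c =>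
        if some (gcell grid r c) = best_block_color then some (r, c) else none))
  -- min()/max() of the four generators (empty list excluded by Pre_)
  let min_r : Int := (PySem.List.min? (block_cells.map (·.1)) (fun x => x)).getD 0
  let max_r : Int := (PySem.List.max? (block_cells.map (·.1)) (fun x => x)).getD 0
  let min_c : Int := (PySem.List.min? (block_cells.map (·.2)) (fun x => x)).getD 0
  let max_c : Int := (PySem.List.max? (block_cells.map (·.2)) (fun x => x)).getD 0
  let sub_h := PySem.Int.floordiv (max_r - min_r + 1) 3
  let sub_w := PySem.Int.floordiv (max_c - min_c + 1) 3
  -- result = [[0]*3 for _ in range(3)]; then the double loop mutating result[sr][sc]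
  (PySem.List.pyRange 0 3 1).foldl (fun result sr =>
    (PySem.List.pyRange 0 3 1).foldl (fun result sc =>
      let r_start := min_r + sr * sub_h
      let c_start := min_c + sc * sub_w
      let filled := ((PySem.List.pyRange 0 sub_h 1).flatMap (fun dr =>
        (PySem.List.pyRange 0 sub_w 1).map (fun dc => (dr, dc)))).all (fun p =>
          decide (some (gcell grid (r_start + p.1) (c_start + p.2)) = best_block_color))
      if filled then
        PySem.List.pySetD result sr
          (PySem.List.pySetD (PySem.List.pyGetD result sr []) sc scatter_color)
      else result) result) [[0, 0, 0], [0, 0, 0], [0, 0, 0]]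

-- ===== PORT B =====
-- B grows a component by set dilation: one round adds every in-bounds same-colour
-- neighbour of the current cell set.  candList is the set comprehension's feed.
def candList (grid : List (List Int)) (h w v : Int) (comp : List (Int × Int)) :
    List (Int × Int) :=
  comp.flatMap (fun p => dirs.filterMap (fun d =>
    if 0 ≤ p.1 + d.1 ∧ p.1 + d.1 < h ∧ 0 ≤ p.2 + d.2 ∧ p.2 + d.2 < w ∧
        gcell grid (p.1 + d.1) (p.2 + d.2) = v then some (p.1 + d.1, p.2 + d.2) else none))

-- grown = comp | {…}
def dilate (grid : List (List Int)) (h w v : Int) (comp : PySem.Set (Int × Int)) :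
    PySem.Set (Int × Int) :=
  PySem.Set.union comp (PySem.Set.ofList (candList grid h w v comp))

lemma mem_candList_allCells (grid : List (List Int)) (h w v : Int)
    (comp : List (Int × Int)) (q : Int × Int) (hq : q ∈ candList grid h w v comp) :
    q ∈ allCells h w := by
  rw [candList, List.mem_flatMap] at hq
  obtain ⟨p, _, hq⟩ := hq
  rw [List.mem_filterMap] at hq
  obtain ⟨d, _, hite⟩ := hq
  split_ifs at hite with hg
  simp only [Option.some.injEq] at hite
  rw [← hite, mem_allCells]
  exact ⟨hg.1, hg.2.1, hg.2.2.1, hg.2.2.2.1⟩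

lemma dilate_shape (grid : List (List Int)) (h w v : Int) (comp : PySem.Set (Int × Int)) :
    ∃ extras, dilate grid h w v comp = comp ++ extras ∧ extras.Nodup ∧
      ∀ y ∈ extras, y ∉ comp ∧ y ∈ allCells h w := by
  refine ⟨(PySem.Set.ofList (candList grid h w v comp)).filter
    (fun y => !PySem.Set.contains comp y), ?_, ?_, ?_⟩
  · have he : dilate grid h w v comp
        = PySem.Set.update comp (PySem.Set.ofList (candList grid h w v comp)) := rfl
    rw [he, PySem.Set.update_eq_append_filter, PySem.Set.ofList_ofList]
  · exact (PySem.Set.nodup_ofList _).filter _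
  · intro y hy
    rw [List.mem_filter] at hy
    obtain ⟨hy1, hy2⟩ := hy
    refine ⟨?_, mem_candList_allCells grid h w v comp y
      ((PySem.Set.mem_ofList _ y).mp hy1)⟩
    intro hyc
    have hcon : PySem.Set.contains comp y = true := (PySem.Set.contains_iff comp y).mpr hyc
    rw [hcon] at hy2
    simp at hy2

lemma unvis_append_many (h w : Int) :
    ∀ (extras vis : List (Int × Int)), extras.Nodup →
      (∀ y ∈ extras, y ∉ vis ∧ y ∈ allCells h w) →
      unvis h w (vis ++ extras) + extras.length = unvis h w vis := by
  intro extras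
  induction extras with
  | nil => intro vis _ _; simp
  | cons e rest ih =>
      intro vis hnd hmem
      have h1 : unvis h w (vis ++ [e]) + 1 = unvis h w vis :=
        unvis_append h w vis e (hmem e (by simp)).2 (hmem e (by simp)).1
      have h2 : unvis h w ((vis ++ [e]) ++ rest) + rest.length = unvis h w (vis ++ [e]) := by
        refine ih (vis ++ [e]) (List.nodup_cons.mp hnd).2 ?_
        intro y hy
        refine ⟨?_, (hmem y (by simp [hy])).2⟩
        intro hyv
        rcases List.mem_append.mp hyv with hyv | hyv
        · exact (hmem y (by simp [hy])).1 hyv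
        · simp at hyv
          exact (List.nodup_cons.mp hnd).1 (hyv ▸ hy)
      rw [List.append_cons]
      simp only [List.length_cons]
      omega

lemma dilate_measure (grid : List (List Int)) (h w v : Int) (comp : PySem.Set (Int × Int))
    (hne : ¬ PySem.Set.equal (dilate grid h w v comp) comp = true) :
    unvis h w (dilate grid h w v comp) < unvis h w comp := by
  obtain ⟨extras, hsh, hnd, hmem⟩ := dilate_shape grid h w v comp
  cases extras with
  | nil =>
      exfalso
      apply hne
      rw [hsh]
      simp [PySem.Set.equal_iff]
  | cons e rest =>
      have := unvis_append_many h w (e :: rest) comp hnd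
        (fun y hy => ⟨(hmem y hy).1, (hmem y hy).2⟩)
      rw [hsh]
      simp only [List.length_cons] at this
      omega

-- B's `while True:` dilation-to-fixpoint loop (break when grown == comp)
def fixLoop (grid : List (List Int)) (h w v : Int) (comp : PySem.Set (Int × Int)) :
    PySem.Set (Int × Int) :=
  if PySem.Set.equal (dilate grid h w v comp) comp then comp
  else fixLoop grid h w v (dilate grid h w v comp)
termination_by unvis h w comp
decreasing_by exact dilate_measure grid h w v comp (by assumption)

-- B's per-cell step of the single labeling pass (state: seen × {color ↦ largest size})
def stepB (grid : List (List Int)) (h w : Int)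
    (st : PySem.Set (Int × Int) × PySem.Dict Int Int) (p : Int × Int) :
    PySem.Set (Int × Int) × PySem.Dict Int Int :=
  let v := gcell grid p.1 p.2
  if v ≠ 0 ∧ p ∉ st.1 then
    let comp := fixLoop grid h w v [p]
    let seen := PySem.Set.union st.1 comp
    if (comp.length : Int) > st.2.getD v 0 then (seen, st.2.insert v (comp.length : Int))
    else (seen, st.2)
  else st

def solve_5ad4f10b_alt (grid : List (List Int)) : List (List Int) :=
  let h : Int := grid.length
  let w : Int := (PySem.List.pyGetD grid 0 []).length
  let best : PySem.Dict Int Int :=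
    ((PySem.List.pyRange 0 h 1).foldl (fun st r =>
      (PySem.List.pyRange 0 w 1).foldl (fun st c => stepB grid h w st (r, c)) st)
      ((PySem.Set.empty : PySem.Set (Int × Int)), (PySem.Dict.empty : PySem.Dict Int Int))).2
  -- max(colors, key=lambda col: best[col])  (ValueError on empty set excluded by Pre_;
  -- best[col] exists for every col in colors, so getD's default is never taken)
  let best_block_color : Int :=
    (PySem.List.max? (colorsList grid h w) (fun col => best.getD col 0)).getD 0
  -- next(col for col in colors if col != best_block_color) (StopIteration excluded by Pre_)
  let scatter_color : Int :=
    ((colorsList grid h w).filter (fun col => decide (col ≠ best_block_color))).headD 0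
  let block_rows : List Int := (PySem.List.pyRange 0 h 1).filter (fun r =>
    (PySem.List.pyRange 0 w 1).any (fun c => decide (gcell grid r c = best_block_color)))
  let block_cols : List Int := (PySem.List.pyRange 0 w 1).filter (fun c =>
    (PySem.List.pyRange 0 h 1).any (fun r => decide (gcell grid r c = best_block_color)))
  let min_r : Int := PySem.List.pyGetD block_rows 0 0
  let max_r : Int := PySem.List.pyGetD block_rows (-1) 0
  let min_c : Int := PySem.List.pyGetD block_cols 0 0
  let max_c : Int := PySem.List.pyGetD block_cols (-1) 0
  let sub_h := PySem.Int.floordiv (max_r - min_r + 1) 3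
  let sub_w := PySem.Int.floordiv (max_c - min_c + 1) 3
  (PySem.List.pyRange 0 3 1).map (fun sr =>
    (PySem.List.pyRange 0 3 1).map (fun sc =>
      if (PySem.List.pyRange 0 sub_h 1).all (fun dr =>
           (PySem.List.pyRange 0 sub_w 1).all (fun dc =>
             decide (gcell grid (min_r + sr * sub_h + dr) (min_c + sc * sub_w + dc)
               = best_block_color)))
      then scatter_color else 0))

-- ===== PRECONDITION & SPEC =====
-- Pre_ excludes exactly the inputs on which the Python A raises: a row shorter than
-- row 0 (IndexError), and fewer than two distinct nonzero colours (min/ValueError on an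
-- empty generator, or IndexError picking the scatter colour).
def Pre_solve_5ad4f10b (grid : List (List Int)) : Prop :=
  (∀ row ∈ grid, (PySem.List.pyGetD grid 0 []).length ≤ row.length) ∧
  2 ≤ (PySem.List.dedup (colorSeq grid (grid.length : Int)
    ((PySem.List.pyGetD grid 0 []).length : Int))).length

instance (grid : List (List Int)) : Decidable (Pre_solve_5ad4f10b grid) := by
  unfold Pre_solve_5ad4f10b; infer_instance

def pvWitness_solve_5ad4f10b : List (List Int) := [[1, 1], [2, 0]]

def Spec_solve_5ad4f10b (grid : List (List Int)) (out : List (List Int)) : Prop :=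
  out = solve_5ad4f10b_alt grid
instance (grid : List (List Int)) (out : List (List Int)) : Decidable (Spec_solve_5ad4f10b grid out) := by
  unfold Spec_solve_5ad4f10b; infer_instance

-- ===== CLAIM (what is proved, stated in full; the proofs are below) =====
def Claim_equal_solve_5ad4f10b : Prop := ∀ (grid : List (List Int)), Dom_solve_5ad4f10b grid → Pre_solve_5ad4f10b grid → Spec_solve_5ad4f10b grid (solve_5ad4f10b grid)

-- ===== LEMMAS AND PROOFS =====

-- ground truth for the proofs: the 4-connected monochromatic component of a cell,
-- as the fixpoint of neighbourhood expansion (independent of either port's traversal)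
def adjb (p q : Int × Int) : Bool :=
  (q.1 == p.1 - 1 && q.2 == p.2) || (q.1 == p.1 + 1 && q.2 == p.2) ||
  (q.1 == p.1 && q.2 == p.2 - 1) || (q.1 == p.1 && q.2 == p.2 + 1)

def cellsF (grid : List (List Int)) (h w col : Int) : Finset (Int × Int) :=
  ((allCells h w).filter (fun p => decide (gcell grid p.1 p.2 = col))).toFinset

def grow (grid : List (List Int)) (h w col : Int) (S : Finset (Int × Int)) :
    Finset (Int × Int) :=
  S ∪ (cellsF grid h w col).filter (fun q => ∃ p ∈ S, adjb p q = true)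

def comp (grid : List (List Int)) (h w col : Int) (s : Int × Int) : Finset (Int × Int) :=
  (grow grid h w col)^[h.toNat * w.toNat] {s}

-- running maximum of component sizes of the colour-col cells of P, from init bs
def sizeMax (grid : List (List Int)) (h w col : Int) (P : List (Int × Int)) (bs : Int) : Int :=
  P.foldl (fun acc p =>
    if gcell grid p.1 p.2 = col then max acc ((comp grid h w col p).card : Int) else acc) bs


lemma length_allCells (h w : Int) : (allCells h w).length = h.toNat * w.toNat := by
  simp [allCells, List.length_flatMap, PySem.List.length_pyRange_one, List.map_const']

lemma mem_cellsF (grid : List (List Int)) (h w col : Int) (p : Int × Int) :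
    p ∈ cellsF grid h w col ↔ p ∈ allCells h w ∧ gcell grid p.1 p.2 = col := by
  simp [cellsF]

lemma adjb_iff (p q : Int × Int) :
    adjb p q = true ↔ q = (p.1 - 1, p.2) ∨ q = (p.1 + 1, p.2) ∨
      q = (p.1, p.2 - 1) ∨ q = (p.1, p.2 + 1) := by
  simp [adjb, Prod.ext_iff]
  tauto

lemma adjb_symm (p q : Int × Int) (hpq : adjb p q = true) : adjb q p = true := by
  rw [adjb_iff] at hpq ⊢
  obtain ⟨a, b⟩ := p; obtain ⟨c, d⟩ := q
  simp [Prod.ext_iff] at hpq ⊢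
  omega

lemma adjb_dirs (p : Int × Int) (d : Int × Int) (hd : d ∈ dirs) :
    adjb p (p.1 + d.1, p.2 + d.2) = true := by
  fin_cases hd <;> (rw [adjb_iff]; simp [Prod.ext_iff]) <;> omega

lemma subset_grow (grid : List (List Int)) (h w col : Int) (S : Finset (Int × Int)) :
    S ⊆ grow grid h w col S :=
  Finset.subset_union_left

lemma iterate_subset_cellsF (grid : List (List Int)) (h w col : Int) {s : Int × Int}
    (hs : s ∈ cellsF grid h w col) (k : Nat) :
    (grow grid h w col)^[k] {s} ⊆ cellsF grid h w col := by
  induction k with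
  | zero => simpa using hs
  | succ k ih =>
      rw [Function.iterate_succ_apply']
      intro x hx
      rw [grow, Finset.mem_union] at hx
      rcases hx with hx | hx
      · exact ih hx
      · exact (Finset.mem_filter.mp hx).1

lemma self_mem_iterate (grid : List (List Int)) (h w col : Int) (s : Int × Int) (k : Nat) :
    s ∈ (grow grid h w col)^[k] {s} := by
  induction k with
  | zero => simp
  | succ k ih =>
      rw [Function.iterate_succ_apply']
      exact subset_grow grid h w col _ ih

lemma self_mem_comp (grid : List (List Int)) (h w col : Int) (s : Int × Int) :
    s ∈ comp grid h w col s :=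
  self_mem_iterate grid h w col s _

lemma comp_subset_cellsF (grid : List (List Int)) (h w col : Int) {s : Int × Int}
    (hs : s ∈ cellsF grid h w col) :
    comp grid h w col s ⊆ cellsF grid h w col :=
  iterate_subset_cellsF grid h w col hs _

lemma comp_card_pos (grid : List (List Int)) (h w col : Int) (s : Int × Int) :
    0 < (comp grid h w col s).card :=
  Finset.card_pos.mpr ⟨s, self_mem_comp grid h w col s⟩

lemma cellsF_card_le (grid : List (List Int)) (h w col : Int) :
    (cellsF grid h w col).card ≤ h.toNat * w.toNat := by
  calc (cellsF grid h w col).card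
      ≤ ((allCells h w).filter (fun p => decide (gcell grid p.1 p.2 = col))).length :=
        List.toFinset_card_le _
    _ ≤ (allCells h w).length := List.length_filter_le _ _
    _ = h.toNat * w.toNat := length_allCells h w

lemma comp_fixed (grid : List (List Int)) (h w col : Int) {s : Int × Int}
    (hs : s ∈ cellsF grid h w col) :
    grow grid h w col (comp grid h w col s) = comp grid h w col s := by
  set g := grow grid h w col with hg
  set N := h.toNat * w.toNat with hN
  have key : ∃ k, k ≤ N ∧ g (g^[k] {s}) = g^[k] {s} := by
    by_contra hcon
    push Not at hcon
    have hgrow : ∀ k, k ≤ N → k + 1 ≤ (g^[k] {s}).card := by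
      intro k hk
      induction k with
      | zero => simp
      | succ k ih =>
          have hk' : k ≤ N := by omega
          have hne := hcon k hk'
          have hss : g^[k] {s} ⊂ g (g^[k] {s}) :=
            lt_of_le_of_ne (subset_grow grid h w col _) (Ne.symm hne)
          have := Finset.card_lt_card hss
          have := ih hk'
          rw [Function.iterate_succ_apply']
          omega
    have h1 := hgrow N le_rfl
    have h2 : (g^[N] {s}).card ≤ N :=
      le_trans (Finset.card_le_card (iterate_subset_cellsF grid h w col hs N))
        (cellsF_card_le grid h w col)
    omega
  obtain ⟨k, hkN, hfix⟩ := key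
  have hpersist : ∀ m, g^[k + m] {s} = g^[k] {s} := by
    intro m
    induction m with
    | zero => rfl
    | succ m ih =>
        have hstep : g^[k + (m + 1)] {s} = g (g^[k + m] {s}) := by
          rw [show k + (m + 1) = (k + m) + 1 by omega, Function.iterate_succ_apply']
        rw [hstep, ih, hfix]
  have hNk : comp grid h w col s = g^[k] {s} := by
    rw [comp, ← hg, ← hN, show N = k + (N - k) by omega]
    exact hpersist (N - k)
  rw [hNk]
  exact hfix

lemma comp_closed (grid : List (List Int)) (h w col : Int) {s : Int × Int}
    (hs : s ∈ cellsF grid h w col) {p q : Int × Int}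
    (hp : p ∈ comp grid h w col s) (hq : q ∈ cellsF grid h w col)
    (hadj : adjb p q = true) : q ∈ comp grid h w col s := by
  rw [← comp_fixed grid h w col hs, grow, Finset.mem_union]
  exact Or.inr (Finset.mem_filter.mpr ⟨hq, p, hp, hadj⟩)

lemma comp_min (grid : List (List Int)) (h w col : Int) {s : Int × Int}
    (hs : s ∈ cellsF grid h w col) {T : Finset (Int × Int)} (hsT : s ∈ T)
    (hcl : ∀ p ∈ T, p ∈ cellsF grid h w col →
      ∀ q ∈ cellsF grid h w col, adjb p q = true → q ∈ T) :
    comp grid h w col s ⊆ T := by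
  have : ∀ k, (grow grid h w col)^[k] {s} ⊆ T := by
    intro k
    induction k with
    | zero => simpa using hsT
    | succ k ih =>
        rw [Function.iterate_succ_apply']
        intro x hx
        rw [grow, Finset.mem_union] at hx
        rcases hx with hx | hx
        · exact ih hx
        · rw [Finset.mem_filter] at hx
          obtain ⟨hxF, p, hp, hadj⟩ := hx
          exact hcl p (ih hp) (iterate_subset_cellsF grid h w col hs k hp) x hxF hadj
  exact this _

lemma comp_eq_of_mem (grid : List (List Int)) (h w col : Int) {s y : Int × Int}
    (hs : s ∈ cellsF grid h w col) (hy : y ∈ comp grid h w col s) :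
    comp grid h w col y = comp grid h w col s := by
  suffices hsuff : ∀ k, ∀ y ∈ (grow grid h w col)^[k] {s}, comp grid h w col y = comp grid h w col s by
    exact hsuff _ y hy
  intro k
  induction k with
  | zero => intro y hy; simp at hy; rw [hy]
  | succ k ih =>
      intro y hy
      rw [Function.iterate_succ_apply', grow, Finset.mem_union] at hy
      rcases hy with hy | hy
      · exact ih y hy
      · rw [Finset.mem_filter] at hy
        obtain ⟨hyF, p, hp, hadj⟩ := hy
        have hpF : p ∈ cellsF grid h w col := iterate_subset_cellsF grid h w col hs k hp
        have hps := ih p hp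
        have hpy : p ∈ comp grid h w col y :=
          comp_closed grid h w col hyF (self_mem_comp grid h w col y) hpF
            (adjb_symm p y hadj)
        have hyp : y ∈ comp grid h w col p :=
          comp_closed grid h w col hpF (self_mem_comp grid h w col p) hyF hadj
        have h1 : comp grid h w col y ⊆ comp grid h w col p :=
          comp_min grid h w col hyF hyp
            (fun a ha haF q hqF hadj' => comp_closed grid h w col hpF ha hqF hadj')
        have h2 : comp grid h w col p ⊆ comp grid h w col y :=
          comp_min grid h w col hpF hpy
            (fun a ha haF q hqF hadj' => comp_closed grid h w col hyF ha hqF hadj')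
        rw [← hps]
        exact le_antisymm h1 h2


lemma bfsRelax_eq (grid : List (List Int)) (h w col cr cc : Int)
    (vis : PySem.Set (Int × Int)) (qt : List (Int × Int)) (d : Int × Int) :
    bfsRelax grid h w col cr cc (vis, qt) d =
      if ((cr + d.1, cc + d.2) ∈ cellsF grid h w col ∧ (cr + d.1, cc + d.2) ∉ vis) then
        (vis ++ [(cr + d.1, cc + d.2)], qt ++ [(cr + d.1, cc + d.2)])
      else (vis, qt) := by
  unfold bfsRelax
  simp only []
  have hiff : (0 ≤ cr + d.1 ∧ cr + d.1 < h ∧ 0 ≤ cc + d.2 ∧ cc + d.2 < w ∧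
      (cr + d.1, cc + d.2) ∉ vis ∧ gcell grid (cr + d.1) (cc + d.2) = col) ↔
      ((cr + d.1, cc + d.2) ∈ cellsF grid h w col ∧ (cr + d.1, cc + d.2) ∉ vis) := by
    rw [mem_cellsF, mem_allCells]
    tauto
  rw [if_congr hiff rfl rfl]
  split_ifs with hc
  · have hadd : PySem.Set.add vis (cr + d.1, cc + d.2) = vis ++ [(cr + d.1, cc + d.2)] := by
      simp [PySem.Set.add, PySem.Set.contains]; exact hc.2
    rw [hadd]
  · rfl

lemma relaxFold_spec (grid : List (List Int)) (h w col : Int) (cell : Int × Int)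
    (ds : List (Int × Int)) :
    ∀ (_ : ∀ d ∈ ds, d ∈ dirs) (vis : PySem.Set (Int × Int)) (qt : List (Int × Int)),
    ∃ new : List (Int × Int),
      (ds.foldl (bfsRelax grid h w col cell.1 cell.2) (vis, qt)).1 = vis ++ new ∧
      (ds.foldl (bfsRelax grid h w col cell.1 cell.2) (vis, qt)).2 = qt ++ new ∧
      new.Nodup ∧
      (∀ y ∈ new, y ∉ vis ∧ y ∈ cellsF grid h w col ∧ adjb cell y = true) ∧
      (∀ d ∈ ds,
        (cell.1 + d.1, cell.2 + d.2) ∈ (ds.foldl (bfsRelax grid h w col cell.1 cell.2) (vis, qt)).1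
        ∨ (cell.1 + d.1, cell.2 + d.2) ∉ cellsF grid h w col) := by
  induction ds with
  | nil =>
      intro _ vis qt
      exact ⟨[], by simp, by simp, by simp, by simp, by simp⟩
  | cons d ds ih =>
      intro hds vis qt
      have hd : d ∈ dirs := hds d (by simp)
      have hds' : ∀ x ∈ ds, x ∈ dirs := fun x hx => hds x (by simp [hx])
      rw [List.foldl_cons, bfsRelax_eq]
      by_cases hC : ((cell.1 + d.1, cell.2 + d.2) ∈ cellsF grid h w col ∧
          (cell.1 + d.1, cell.2 + d.2) ∉ vis)
      · rw [if_pos hC]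
        obtain ⟨new', h1, h2, h3, h4, h5⟩ :=
          ih hds' (vis ++ [(cell.1 + d.1, cell.2 + d.2)]) (qt ++ [(cell.1 + d.1, cell.2 + d.2)])
        refine ⟨(cell.1 + d.1, cell.2 + d.2) :: new', ?_, ?_, ?_, ?_, ?_⟩
        · rw [h1]; simp
        · rw [h2]; simp
        · refine List.Nodup.cons ?_ h3
          intro hy
          exact (h4 _ hy).1 (by simp)
        · intro z hz
          rcases List.mem_cons.mp hz with hz | hz
          · subst hz
            exact ⟨hC.2, hC.1, adjb_dirs cell d hd⟩
          · obtain ⟨hz1, hz2, hz3⟩ := h4 z hz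
            exact ⟨fun hzv => hz1 (by simp [hzv]), hz2, hz3⟩
        · intro d' hd'
          rcases List.mem_cons.mp hd' with hd' | hd'
          · subst hd'
            left
            rw [h1]
            simp
          · exact h5 d' hd'
      · rw [if_neg hC]
        obtain ⟨new', h1, h2, h3, h4, h5⟩ := ih hds' vis qt
        refine ⟨new', h1, h2, h3, h4, ?_⟩
        intro d' hd'
        rcases List.mem_cons.mp hd' with hd' | hd'
        · subst hd'
          by_cases hF : (cell.1 + d'.1, cell.2 + d'.2) ∈ cellsF grid h w col
          · left
            have hv : (cell.1 + d'.1, cell.2 + d'.2) ∈ vis := by tauto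
            rw [h1]
            exact List.mem_append_left _ hv
          · exact Or.inr hF
        · exact h5 d' hd'

lemma bfs_spec (grid : List (List Int)) (h w col : Int) (s : Int × Int)
    (hs : s ∈ cellsF grid h w col) :
    ∀ (q : List (Int × Int)) (vis : PySem.Set (Int × Int)) (size : Int),
    (∀ x ∈ q, x ∈ comp grid h w col s) →
    (∀ x ∈ q, x ∈ vis) →
    q.Nodup →
    vis.Nodup →
    s ∈ vis →
    (∀ x ∈ vis, x ∈ cellsF grid h w col →
      x ∈ q ∨ (∀ y, adjb x y = true → y ∈ cellsF grid h w col → y ∈ vis)) →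
    (∀ x ∈ vis, x ∈ (bfsLoop grid h w col q vis size).1) ∧
    (∀ x ∈ (bfsLoop grid h w col q vis size).1, x ∈ vis ∨ x ∈ comp grid h w col s) ∧
    (∀ x ∈ comp grid h w col s, x ∈ (bfsLoop grid h w col q vis size).1) ∧
    (bfsLoop grid h w col q vis size).1.Nodup ∧
    ((bfsLoop grid h w col q vis size).2 + (vis.length : Int)
      = size + (q.length : Int) + ((bfsLoop grid h w col q vis size).1.length : Int)) := by
  intro q vis size
  induction q, vis, size using bfsLoop.induct grid h w col with
  | case1 vis size =>
      intro hqc hqv hqnd hvnd hsv hcl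
      rw [bfsLoop]
      refine ⟨fun x hx => hx, fun x hx => Or.inl hx, ?_, hvnd, by simp⟩
      intro x hx
      have hsub : comp grid h w col s ⊆ vis.toFinset := by
        apply comp_min grid h w col hs (by simpa using hsv)
        intro p hp hpF y hyF hadj
        rcases hcl p (by simpa using hp) hpF with hq | hclp
        · simp at hq
        · simpa using hclp y hadj hyF
      simpa using hsub hx
  | case2 cell qt vis size st ih =>
      intro hqc hqv hqnd hvnd hsv hcl
      obtain ⟨new, hv1, hq1, hnd1, hprops, hcover⟩ :=
        relaxFold_spec grid h w col cell dirs (fun d hd => hd) vis qt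
      have hcellcomp : cell ∈ comp grid h w col s := hqc cell (by simp)
      have hnewcomp : ∀ y ∈ new, y ∈ comp grid h w col s := fun y hy =>
        comp_closed grid h w col hs hcellcomp (hprops y hy).2.1 (hprops y hy).2.2
      have hqtnd := (List.nodup_cons.mp hqnd).2
      have hcellqt := (List.nodup_cons.mp hqnd).1
      have hP1 : ∀ x ∈ (dirs.foldl (bfsRelax grid h w col cell.1 cell.2) (vis, qt)).2,
          x ∈ comp grid h w col s := by
        rw [hq1]; intro x hx
        rcases List.mem_append.mp hx with hx | hx
        · exact hqc x (by simp [hx])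
        · exact hnewcomp x hx
      have hP2 : ∀ x ∈ (dirs.foldl (bfsRelax grid h w col cell.1 cell.2) (vis, qt)).2,
          x ∈ (dirs.foldl (bfsRelax grid h w col cell.1 cell.2) (vis, qt)).1 := by
        rw [hq1, hv1]; intro x hx
        rcases List.mem_append.mp hx with hx | hx
        · exact List.mem_append_left _ (hqv x (by simp [hx]))
        · exact List.mem_append_right _ hx
      have hP3 : (dirs.foldl (bfsRelax grid h w col cell.1 cell.2) (vis, qt)).2.Nodup := by
        rw [hq1, List.nodup_append]
        exact ⟨hqtnd, hnd1, fun a ha b hb hab => (hprops b hb).1 (hab ▸ hqv a (by simp [ha]))⟩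
      have hP4 : (dirs.foldl (bfsRelax grid h w col cell.1 cell.2) (vis, qt)).1.Nodup := by
        rw [hv1, List.nodup_append]
        exact ⟨hvnd, hnd1, fun a ha b hb hab => (hprops b hb).1 (hab ▸ ha)⟩
      have hP5 : s ∈ (dirs.foldl (bfsRelax grid h w col cell.1 cell.2) (vis, qt)).1 := by
        rw [hv1]; exact List.mem_append_left _ hsv
      have hP6 : ∀ x ∈ (dirs.foldl (bfsRelax grid h w col cell.1 cell.2) (vis, qt)).1,
          x ∈ cellsF grid h w col →
          x ∈ (dirs.foldl (bfsRelax grid h w col cell.1 cell.2) (vis, qt)).2 ∨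
          (∀ y, adjb x y = true → y ∈ cellsF grid h w col →
            y ∈ (dirs.foldl (bfsRelax grid h w col cell.1 cell.2) (vis, qt)).1) := by
        intro x hx hxF
        by_cases hxc : x = cell
        · subst hxc
          right
          intro y hadj hyF
          rcases (adjb_iff x y).mp hadj with hy | hy | hy | hy
          · have heq : (x.1 + (-1 : Int), x.2 + (0 : Int)) = y := by rw [hy, Prod.mk.injEq]; omega
            rcases hcover (-1, 0) (by simp [dirs]) with hc | hc
            · rw [← heq]; exact hc
            · exact absurd (heq ▸ hyF) hc
          · have heq : (x.1 + (1 : Int), x.2 + (0 : Int)) = y := by rw [hy, Prod.mk.injEq]; omega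
            rcases hcover (1, 0) (by simp [dirs]) with hc | hc
            · rw [← heq]; exact hc
            · exact absurd (heq ▸ hyF) hc
          · have heq : (x.1 + (0 : Int), x.2 + (-1 : Int)) = y := by rw [hy, Prod.mk.injEq]; omega
            rcases hcover (0, -1) (by simp [dirs]) with hc | hc
            · rw [← heq]; exact hc
            · exact absurd (heq ▸ hyF) hc
          · have heq : (x.1 + (0 : Int), x.2 + (1 : Int)) = y := by rw [hy, Prod.mk.injEq]; omega
            rcases hcover (0, 1) (by simp [dirs]) with hc | hc
            · rw [← heq]; exact hc
            · exact absurd (heq ▸ hyF) hc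
        · rw [hv1] at hx
          rcases List.mem_append.mp hx with hx | hx
          · rcases hcl x hx hxF with hxq | hxcl
            · left
              rcases List.mem_cons.mp hxq with hxx | hxx
              · exact absurd hxx hxc
              · rw [hq1]; exact List.mem_append_left _ hxx
            · right
              intro y hadj hyF
              rw [hv1]
              exact List.mem_append_left _ (hxcl y hadj hyF)
          · left
            rw [hq1]; exact List.mem_append_right _ hx
      have ihh := ih hP1 hP2 hP3 hP4 hP5 hP6
      rw [bfsLoop]
      obtain ⟨C1, C2, C3, C4, C5⟩ := ihh
      have est : st = List.foldl (bfsRelax grid h w col cell.1 cell.2) (vis, qt) dirs := rfl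
      rw [est] at C5
      refine ⟨?_, ?_, C3, C4, ?_⟩
      · intro x hx
        exact C1 x (by rw [hv1]; exact List.mem_append_left _ hx)
      · intro x hx
        rcases C2 x hx with hx1 | hx1
        · rw [hv1] at hx1
          rcases List.mem_append.mp hx1 with hxa | hxa
          · exact Or.inl hxa
          · exact Or.inr (hnewcomp x hxa)
        · exact Or.inr hx1
      · have hlv : (((dirs.foldl (bfsRelax grid h w col cell.1 cell.2) (vis, qt)).1.length : Int))
            = (vis.length : Int) + (new.length : Int) := by
          rw [hv1]; push_cast [List.length_append]; ring
        have hlq : (((dirs.foldl (bfsRelax grid h w col cell.1 cell.2) (vis, qt)).2.length : Int))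
            = (qt.length : Int) + (new.length : Int) := by
          rw [hq1]; push_cast [List.length_append]; ring
        simp only [List.length_cons]
        push_cast
        omega


lemma bfs_run (grid : List (List Int)) (h w col : Int) (s : Int × Int)
    (V0 : PySem.Set (Int × Int))
    (hs : s ∈ cellsF grid h w col) (hnd : V0.Nodup) (hsV0 : s ∉ V0)
    (hcl0 : ∀ x ∈ V0, x ∈ cellsF grid h w col →
      ∀ y, adjb x y = true → y ∈ cellsF grid h w col → y ∈ V0)
    (hdisj : ∀ x ∈ comp grid h w col s, x ∉ V0) :
    (∀ x, x ∈ (bfsLoop grid h w col [s] (PySem.Set.add V0 s) 0).1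
      ↔ x ∈ V0 ∨ x ∈ comp grid h w col s) ∧
    (bfsLoop grid h w col [s] (PySem.Set.add V0 s) 0).1.Nodup ∧
    (bfsLoop grid h w col [s] (PySem.Set.add V0 s) 0).2
      = ((comp grid h w col s).card : Int) := by
  have hadd : PySem.Set.add V0 s = V0 ++ [s] := by
    simp [PySem.Set.add, PySem.Set.contains]; exact hsV0
  rw [hadd]
  obtain ⟨C1, C2, C3, C4, C5⟩ := bfs_spec grid h w col s hs [s] (V0 ++ [s]) 0
    (by intro x hx; simp at hx; subst hx; exact self_mem_comp grid h w col _)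
    (by intro x hx; simp at hx; subst hx; simp)
    (by simp)
    (by rw [List.nodup_append]
        refine ⟨hnd, by simp, ?_⟩
        intro a ha b hb hab
        simp at hb
        subst hb
        exact hsV0 (hab ▸ ha))
    (by simp)
    (by intro x hx hxF
        rcases List.mem_append.mp hx with hx | hx
        · right
          intro y hadj hyF
          exact List.mem_append_left _ (hcl0 x hx hxF y hadj hyF)
        · simp at hx; subst hx; left; simp)
  have hmem : ∀ x, x ∈ (bfsLoop grid h w col [s] (V0 ++ [s]) 0).1
      ↔ x ∈ V0 ∨ x ∈ comp grid h w col s := by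
    intro x
    constructor
    · intro hx
      rcases C2 x hx with hx1 | hx1
      · rcases List.mem_append.mp hx1 with hxa | hxa
        · exact Or.inl hxa
        · simp at hxa; subst hxa; exact Or.inr (self_mem_comp grid h w col _)
      · exact Or.inr hx1
    · intro hx
      rcases hx with hx | hx
      · exact C1 x (List.mem_append_left _ hx)
      · exact C3 x hx
  refine ⟨hmem, C4, ?_⟩
  have h1 : (bfsLoop grid h w col [s] (V0 ++ [s]) 0).1.toFinset
      = V0.toFinset ∪ comp grid h w col s := by
    ext x
    simp only [List.mem_toFinset, Finset.mem_union, hmem x]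
  have h2 : (bfsLoop grid h w col [s] (V0 ++ [s]) 0).1.length
      = (bfsLoop grid h w col [s] (V0 ++ [s]) 0).1.toFinset.card :=
    (List.toFinset_card_of_nodup C4).symm
  have h3 : Disjoint V0.toFinset (comp grid h w col s) := by
    rw [Finset.disjoint_right]
    intro a ha
    simp only [List.mem_toFinset]
    exact hdisj a ha
  have h4 : (bfsLoop grid h w col [s] (V0 ++ [s]) 0).1.length
      = V0.length + (comp grid h w col s).card := by
    rw [h2, h1, Finset.card_union_of_disjoint h3, List.toFinset_card_of_nodup hnd]
  rw [List.length_append] at C5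
  rw [h4] at C5
  push_cast at C5
  omega

-- invariant of A's per-colour scan: visited is a union of colour-col components,
-- each of size at most the running best
def visInv (grid : List (List Int)) (h w col : Int) (vis : PySem.Set (Int × Int))
    (bs : Int) : Prop :=
  ∀ x ∈ vis, ∃ y, y ∈ cellsF grid h w col ∧ x ∈ comp grid h w col y ∧
    (∀ z ∈ comp grid h w col y, z ∈ vis) ∧ ((comp grid h w col y).card : Int) ≤ bs

lemma sizeMax_cons_pos (grid : List (List Int)) (h w col : Int) (p : Int × Int)
    (L : List (Int × Int)) (bs : Int) (hc : gcell grid p.1 p.2 = col) :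
    sizeMax grid h w col (p :: L) bs
      = sizeMax grid h w col L (max bs ((comp grid h w col p).card : Int)) := by
  simp [sizeMax, hc]

lemma sizeMax_cons_neg (grid : List (List Int)) (h w col : Int) (p : Int × Int)
    (L : List (Int × Int)) (bs : Int) (hc : ¬ gcell grid p.1 p.2 = col) :
    sizeMax grid h w col (p :: L) bs = sizeMax grid h w col L bs := by
  simp [sizeMax, hc]

lemma bs_le_sizeMax (grid : List (List Int)) (h w col : Int) (L : List (Int × Int)) :
    ∀ bs : Int, bs ≤ sizeMax grid h w col L bs := by
  induction L with
  | nil => intro bs; simp [sizeMax]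
  | cons p L ih =>
      intro bs
      by_cases hc : gcell grid p.1 p.2 = col
      · rw [sizeMax_cons_pos grid h w col p L bs hc]
        exact le_trans (le_max_left _ _) (ih _)
      · rw [sizeMax_cons_neg grid h w col p L bs hc]
        exact ih bs

lemma sizeMax_init (grid : List (List Int)) (h w col : Int) (L : List (Int × Int)) :
    ∀ a b : Int, sizeMax grid h w col L (max a b) = max a (sizeMax grid h w col L b) := by
  induction L with
  | nil => intro a b; simp [sizeMax]
  | cons p L ih =>
      intro a b
      by_cases hc : gcell grid p.1 p.2 = col
      · rw [sizeMax_cons_pos grid h w col p L _ hc, sizeMax_cons_pos grid h w col p L b hc,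
          max_assoc, ih]
      · rw [sizeMax_cons_neg grid h w col p L _ hc, sizeMax_cons_neg grid h w col p L b hc,
          ih]

lemma scanA_go (grid : List (List Int)) (h w col : Int) :
    ∀ (L : List (Int × Int)) (vis : PySem.Set (Int × Int)) (b : Option Int) (bs : Int),
    (∀ x ∈ L, x ∈ allCells h w) →
    vis.Nodup →
    visInv grid h w col vis bs →
    (L.foldl (stepA grid h w col) (vis, (b, bs))).2.2 = sizeMax grid h w col L bs ∧
    (L.foldl (stepA grid h w col) (vis, (b, bs))).2.1
      = (if sizeMax grid h w col L bs > bs then some col else b) := by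
  intro L
  induction L with
  | nil =>
      intro vis b bs _ _ _
      constructor
      · simp [sizeMax]
      · simp [sizeMax]
  | cons p L ih =>
      intro vis b bs hLB hvnd hinv
      have hp : p ∈ allCells h w := hLB p (by simp)
      have hLB' : ∀ x ∈ L, x ∈ allCells h w := fun x hx => hLB x (by simp [hx])
      rw [List.foldl_cons]
      by_cases hc : gcell grid p.1 p.2 = col
      · by_cases hvp : p ∈ vis
        · -- already visited: step is a no-op, value already dominated
          have hstep : stepA grid h w col (vis, (b, bs)) p = (vis, (b, bs)) := by
            unfold stepA
            rw [if_neg]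
            simp [hc, hvp]
          rw [hstep]
          obtain ⟨y, hyF, hpy, hycl, hyle⟩ := hinv p hvp
          have hpe : comp grid h w col p = comp grid h w col y :=
            comp_eq_of_mem grid h w col hyF hpy
          have hmax : max bs ((comp grid h w col p).card : Int) = bs := by
            rw [hpe]; omega
          have heq : sizeMax grid h w col (p :: L) bs = sizeMax grid h w col L bs := by
            rw [sizeMax_cons_pos grid h w col p L bs hc, hmax]
          rw [heq]
          exact ih vis b bs hLB' hvnd hinv
        · -- fresh cell: run the BFS
          have hpF : p ∈ cellsF grid h w col := (mem_cellsF grid h w col p).mpr ⟨hp, hc⟩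
          have hcl0 : ∀ x ∈ vis, x ∈ cellsF grid h w col →
              ∀ y, adjb x y = true → y ∈ cellsF grid h w col → y ∈ vis := by
            intro x hx hxF y hadj hyF
            obtain ⟨y', hy'F, hxy', hy'cl, _⟩ := hinv x hx
            exact hy'cl y (comp_closed grid h w col hy'F hxy' hyF hadj)
          have hdisj : ∀ x ∈ comp grid h w col p, x ∉ vis := by
            intro x hx hxv
            obtain ⟨y', hy'F, hxy', hy'cl, _⟩ := hinv x hxv
            have e1 : comp grid h w col x = comp grid h w col p :=
              comp_eq_of_mem grid h w col hpF hx
            have e2 : comp grid h w col x = comp grid h w col y' :=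
              comp_eq_of_mem grid h w col hy'F hxy'
            have : p ∈ comp grid h w col y' := by
              rw [← e2, e1]; exact self_mem_comp grid h w col p
            exact hvp (hy'cl p this)
          obtain ⟨hmem, hnd', hsize⟩ := bfs_run grid h w col p vis hpF hvnd hvp hcl0 hdisj
          have hstep : stepA grid h w col (vis, (b, bs)) p =
              (if (bfsLoop grid h w col [p] (PySem.Set.add vis p) 0).2 > bs
               then ((bfsLoop grid h w col [p] (PySem.Set.add vis p) 0).1, (some col,
                 (bfsLoop grid h w col [p] (PySem.Set.add vis p) 0).2))
               else ((bfsLoop grid h w col [p] (PySem.Set.add vis p) 0).1, (b, bs))) := by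
            unfold stepA
            rw [if_pos ⟨hc, hvp⟩]
          set n : Int := ((comp grid h w col p).card : Int) with hn
          have hvis'mem : ∀ x, x ∈ (bfsLoop grid h w col [p] (PySem.Set.add vis p) 0).1
              ↔ x ∈ vis ∨ x ∈ comp grid h w col p := hmem
          have hsub : ∀ x ∈ vis, x ∈ (bfsLoop grid h w col [p] (PySem.Set.add vis p) 0).1 :=
            fun x hx => (hvis'mem x).mpr (Or.inl hx)
          have hcompsub : ∀ x ∈ comp grid h w col p,
              x ∈ (bfsLoop grid h w col [p] (PySem.Set.add vis p) 0).1 :=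
            fun x hx => (hvis'mem x).mpr (Or.inr hx)
          have heq : sizeMax grid h w col (p :: L) bs = sizeMax grid h w col L (max bs n) := by
            rw [sizeMax_cons_pos grid h w col p L bs hc]
          rw [hstep, hsize]
          by_cases hgt : n > bs
          · rw [if_pos hgt]
            have hinv' : visInv grid h w col
                (bfsLoop grid h w col [p] (PySem.Set.add vis p) 0).1 n := by
              intro x hx
              rcases (hvis'mem x).mp hx with hx1 | hx1
              · obtain ⟨y, hyF, hxy, hycl, hyle⟩ := hinv x hx1
                exact ⟨y, hyF, hxy, fun z hz => hsub z (hycl z hz), by omega⟩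
              · exact ⟨p, hpF, hx1, hcompsub, le_refl n⟩
            obtain ⟨ih1, ih2⟩ := ih _ (some col) n hLB' hnd' hinv'
            have hmaxn : max bs n = n := by omega
            constructor
            · rw [heq, hmaxn]; exact ih1
            · rw [heq, hmaxn]
              rw [ih2]
              have h1 : bs < sizeMax grid h w col L n :=
                lt_of_lt_of_le hgt (bs_le_sizeMax grid h w col L n)
              rw [if_pos h1]
              split_ifs <;> rfl
          · rw [if_neg hgt]
            have hinv' : visInv grid h w col
                (bfsLoop grid h w col [p] (PySem.Set.add vis p) 0).1 bs := by
              intro x hx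
              rcases (hvis'mem x).mp hx with hx1 | hx1
              · obtain ⟨y, hyF, hxy, hycl, hyle⟩ := hinv x hx1
                exact ⟨y, hyF, hxy, fun z hz => hsub z (hycl z hz), hyle⟩
              · exact ⟨p, hpF, hx1, hcompsub, by omega⟩
            obtain ⟨ih1, ih2⟩ := ih _ b bs hLB' hnd' hinv'
            have hmaxn : max bs n = bs := by omega
            constructor
            · rw [heq, hmaxn]; exact ih1
            · rw [heq, hmaxn]; exact ih2
      · have hstep : stepA grid h w col (vis, (b, bs)) p = (vis, (b, bs)) := by
          unfold stepA
          rw [if_neg]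
          simp [hc]
        rw [hstep, sizeMax_cons_neg grid h w col p L bs hc]
        exact ih vis b bs hLB' hvnd hinv


lemma mem_keys_of_getD_pos (d : PySem.Dict Int Int) (k : Int) (hpos : 0 < d.getD k 0) :
    k ∈ d.keys := by
  rw [← PySem.Dict.contains_iff_mem_keys, PySem.Dict.contains_eq_isSome_get?]
  rw [PySem.Dict.getD] at hpos
  cases hg : d.get? k with
  | none => rw [hg] at hpos; simp at hpos
  | some v => simp

lemma gcell_of_mem_comp (grid : List (List Int)) (h w col : Int) {y x : Int × Int}
    (hy : y ∈ cellsF grid h w col) (hx : x ∈ comp grid h w col y) :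
    gcell grid x.1 x.2 = col :=
  ((mem_cellsF grid h w col x).mp (comp_subset_cellsF grid h w col hy hx)).2

-- ===== B-side: the dilation fixpoint computes exactly the ground-truth component =====

lemma mem_candList (grid : List (List Int)) (h w v : Int) (comp : List (Int × Int))
    (q : Int × Int) :
    q ∈ candList grid h w v comp
      ↔ q ∈ cellsF grid h w v ∧ ∃ p ∈ comp, adjb p q = true := by
  rw [candList, List.mem_flatMap]
  constructor
  · rintro ⟨p, hp, hq⟩
    rw [List.mem_filterMap] at hq
    obtain ⟨d, hd, hite⟩ := hq
    split_ifs at hite with hg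
    simp only [Option.some.injEq] at hite
    subst hite
    refine ⟨?_, p, hp, adjb_dirs p d hd⟩
    rw [mem_cellsF, mem_allCells]
    exact ⟨⟨hg.1, hg.2.1, hg.2.2.1, hg.2.2.2.1⟩, hg.2.2.2.2⟩
  · rintro ⟨hqF, p, hp, hadj⟩
    rw [mem_cellsF, mem_allCells] at hqF
    obtain ⟨⟨hb1, hb2, hb3, hb4⟩, hcol⟩ := hqF
    have key : ∀ d : Int × Int, (p.1 + d.1, p.2 + d.2) = q →
        (if 0 ≤ p.1 + d.1 ∧ p.1 + d.1 < h ∧ 0 ≤ p.2 + d.2 ∧ p.2 + d.2 < w ∧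
            gcell grid (p.1 + d.1) (p.2 + d.2) = v
         then some (p.1 + d.1, p.2 + d.2) else none) = some q := by
      intro d hdq
      have h1' : p.1 + d.1 = q.1 := by rw [← hdq]
      have h2' : p.2 + d.2 = q.2 := by rw [← hdq]
      rw [h1', h2', if_pos ⟨hb1, hb2, hb3, hb4, hcol⟩]
    refine ⟨p, hp, List.mem_filterMap.mpr ?_⟩
    rcases (adjb_iff p q).mp hadj with hy | hy | hy | hy
    · exact ⟨(-1, 0), by simp [dirs], key (-1, 0) (by rw [hy, Prod.mk.injEq]; exact ⟨by ring, by ring⟩)⟩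
    · exact ⟨(1, 0), by simp [dirs], key (1, 0) (by rw [hy, Prod.mk.injEq]; exact ⟨by ring, by ring⟩)⟩
    · exact ⟨(0, -1), by simp [dirs], key (0, -1) (by rw [hy, Prod.mk.injEq]; exact ⟨by ring, by ring⟩)⟩
    · exact ⟨(0, 1), by simp [dirs], key (0, 1) (by rw [hy, Prod.mk.injEq]; exact ⟨by ring, by ring⟩)⟩

lemma mem_dilate (grid : List (List Int)) (h w v : Int) (cmp : PySem.Set (Int × Int))
    (q : Int × Int) :
    q ∈ dilate grid h w v cmp
      ↔ q ∈ cmp ∨ (q ∈ cellsF grid h w v ∧ ∃ p ∈ cmp, adjb p q = true) := by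
  rw [dilate, PySem.Set.mem_union, PySem.Set.mem_ofList, mem_candList]

lemma fixLoop_nodup (grid : List (List Int)) (h w v : Int) :
    ∀ cmp : PySem.Set (Int × Int), cmp.Nodup → (fixLoop grid h w v cmp).Nodup := by
  intro cmp
  induction cmp using fixLoop.induct grid h w v with
  | case1 cmp heq => intro hnd; rw [fixLoop, if_pos heq]; exact hnd
  | case2 cmp heq ih =>
      intro hnd
      rw [fixLoop, if_neg heq]
      exact ih (PySem.Set.nodup_union cmp _ hnd)

lemma fixLoop_mono (grid : List (List Int)) (h w v : Int) :
    ∀ cmp : PySem.Set (Int × Int), ∀ x ∈ cmp, x ∈ fixLoop grid h w v cmp := by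
  intro cmp
  induction cmp using fixLoop.induct grid h w v with
  | case1 cmp heq => intro x hx; rw [fixLoop, if_pos heq]; exact hx
  | case2 cmp heq ih =>
      intro x hx
      rw [fixLoop, if_neg heq]
      exact ih x ((mem_dilate grid h w v cmp x).mpr (Or.inl hx))

lemma fixLoop_fixed (grid : List (List Int)) (h w v : Int) :
    ∀ cmp : PySem.Set (Int × Int), ∀ x,
      x ∈ dilate grid h w v (fixLoop grid h w v cmp) ↔ x ∈ fixLoop grid h w v cmp := by
  intro cmp
  induction cmp using fixLoop.induct grid h w v with
  | case1 cmp heq =>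
      intro x
      rw [fixLoop, if_pos heq]
      exact (PySem.Set.equal_iff _ _).mp heq x
  | case2 cmp heq ih =>
      intro x
      rw [fixLoop, if_neg heq]
      exact ih x

lemma fixLoop_subset_comp (grid : List (List Int)) (h w v : Int) (s : Int × Int)
    (hs : s ∈ cellsF grid h w v) :
    ∀ cmp : PySem.Set (Int × Int), (∀ x ∈ cmp, x ∈ comp grid h w v s) →
      ∀ x ∈ fixLoop grid h w v cmp, x ∈ comp grid h w v s := by
  intro cmp
  induction cmp using fixLoop.induct grid h w v with
  | case1 cmp heq => intro hsub; rw [fixLoop, if_pos heq]; exact hsub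
  | case2 cmp heq ih =>
      intro hsub
      rw [fixLoop, if_neg heq]
      refine ih ?_
      intro x hx
      rcases (mem_dilate grid h w v cmp x).mp hx with hx | ⟨hxF, p, hp, hadj⟩
      · exact hsub x hx
      · exact comp_closed grid h w v hs (hsub p hp) hxF hadj

lemma fixLoop_run (grid : List (List Int)) (h w v : Int) (s : Int × Int)
    (hs : s ∈ cellsF grid h w v) :
    (∀ x, x ∈ fixLoop grid h w v [s] ↔ x ∈ comp grid h w v s) ∧
    (fixLoop grid h w v [s]).Nodup ∧
    ((fixLoop grid h w v [s]).length : Int) = ((comp grid h w v s).card : Int) := by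
  have hnd : (fixLoop grid h w v [s]).Nodup :=
    fixLoop_nodup grid h w v [s] (by simp)
  have hmem : ∀ x, x ∈ fixLoop grid h w v [s] ↔ x ∈ comp grid h w v s := by
    intro x
    constructor
    · intro hx
      refine fixLoop_subset_comp grid h w v s hs [s] ?_ x hx
      intro z hz
      have hz' : z = s := by simpa using hz
      rw [hz']
      exact self_mem_comp grid h w v s
    · intro hx
      have hsR : s ∈ fixLoop grid h w v [s] := fixLoop_mono grid h w v [s] s (by simp)
      have hclR : ∀ p ∈ (fixLoop grid h w v [s]).toFinset, p ∈ cellsF grid h w v →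
          ∀ q ∈ cellsF grid h w v, adjb p q = true → q ∈ (fixLoop grid h w v [s]).toFinset := by
        intro p hp _ q hqF hadj
        rw [List.mem_toFinset] at hp ⊢
        exact (fixLoop_fixed grid h w v [s] q).mp
          ((mem_dilate grid h w v _ q).mpr (Or.inr ⟨hqF, p, hp, hadj⟩))
      have := comp_min grid h w v hs (T := (fixLoop grid h w v [s]).toFinset)
        (by rw [List.mem_toFinset]; exact hsR) hclR hx
      rwa [List.mem_toFinset] at this
  refine ⟨hmem, hnd, ?_⟩
  have hfin : (fixLoop grid h w v [s]).toFinset = comp grid h w v s := by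
    ext x
    rw [List.mem_toFinset]
    exact hmem x
  rw [← hfin, List.toFinset_card_of_nodup hnd]

-- invariant of B's single labeling pass: seen is a union of components (any colour),
-- each of size at most its colour's dict entry
def visInvB (grid : List (List Int)) (h w : Int) (vis : PySem.Set (Int × Int))
    (d : PySem.Dict Int Int) : Prop :=
  ∀ x ∈ vis, ∃ col y, col ≠ 0 ∧ y ∈ cellsF grid h w col ∧ x ∈ comp grid h w col y ∧
    (∀ z ∈ comp grid h w col y, z ∈ vis) ∧ ((comp grid h w col y).card : Int) ≤ d.getD col 0

lemma scanB_go (grid : List (List Int)) (h w : Int) :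
    ∀ (L : List (Int × Int)) (vis : PySem.Set (Int × Int)) (d : PySem.Dict Int Int),
    (∀ x ∈ L, x ∈ allCells h w) →
    vis.Nodup →
    visInvB grid h w vis d →
    (∀ col, col ≠ 0 → (L.foldl (stepB grid h w) (vis, d)).2.getD col 0
        = sizeMax grid h w col L (d.getD col 0)) ∧
    (∀ col, col ∈ (L.foldl (stepB grid h w) (vis, d)).2.keys
        ↔ col ∈ d.keys ∨ (col ≠ 0 ∧ ∃ y ∈ L, gcell grid y.1 y.2 = col)) := by
  intro L
  induction L with
  | nil =>
      intro vis d _ _ _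
      constructor
      · intro col _; simp [sizeMax]
      · intro col; simp
  | cons p L ih =>
      intro vis d hLB hvnd hinv
      have hp : p ∈ allCells h w := hLB p (by simp)
      have hLB' : ∀ x ∈ L, x ∈ allCells h w := fun x hx => hLB x (by simp [hx])
      rw [List.foldl_cons]
      by_cases hc0 : gcell grid p.1 p.2 = 0
      · have hstep : stepB grid h w (vis, d) p = (vis, d) := by
          unfold stepB
          rw [if_neg]
          simp [hc0]
        rw [hstep]
        obtain ⟨ih1, ih2⟩ := ih vis d hLB' hvnd hinv
        constructor
        · intro col hcol
          rw [ih1 col hcol, sizeMax_cons_neg grid h w col p L _ (by rw [hc0]; exact fun hh => hcol hh.symm)]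
        · intro col
          rw [ih2 col]
          constructor
          · rintro (hk | ⟨hne, y, hy, hgy⟩)
            · exact Or.inl hk
            · exact Or.inr ⟨hne, y, by simp [hy], hgy⟩
          · rintro (hk | ⟨hne, y, hy, hgy⟩)
            · exact Or.inl hk
            · rcases List.mem_cons.mp hy with hy | hy
              · subst hy; exact absurd hgy (by rw [hc0]; exact fun hh => hne hh.symm)
              · exact Or.inr ⟨hne, y, hy, hgy⟩
      · set c : Int := gcell grid p.1 p.2 with hcdef
        by_cases hvp : p ∈ vis
        · have hstep : stepB grid h w (vis, d) p = (vis, d) := by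
            unfold stepB
            rw [if_neg]
            simp [hvp]
          rw [hstep]
          obtain ⟨col', y, hcol'0, hyF, hpy, hycl, hyle⟩ := hinv p hvp
          have hgp : gcell grid p.1 p.2 = col' := gcell_of_mem_comp grid h w col' hyF hpy
          have hcc : c = col' := by rw [hcdef, hgp]
          subst hcc
          have hpe : comp grid h w c p = comp grid h w c y :=
            comp_eq_of_mem grid h w c hyF hpy
          obtain ⟨ih1, ih2⟩ := ih vis d hLB' hvnd hinv
          constructor
          · intro col hcol
            by_cases hcolc : col = c
            · rw [hcolc, ih1 c (by rw [hcolc] at hcol; exact hcol),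
                sizeMax_cons_pos grid h w c p L _ hgp]
              have hmx : max (d.getD c 0) ((comp grid h w c p).card : Int) = d.getD c 0 := by
                rw [hpe]; omega
              rw [hmx]
            · rw [ih1 col hcol, sizeMax_cons_neg grid h w col p L _ (by rw [hgp]; exact fun hh => hcolc hh.symm)]
          · intro col
            rw [ih2 col]
            constructor
            · rintro (hk | ⟨hne, z, hz, hgz⟩)
              · exact Or.inl hk
              · exact Or.inr ⟨hne, z, by simp [hz], hgz⟩
            · rintro (hk | ⟨hne, z, hz, hgz⟩)
              · exact Or.inl hk
              · rcases List.mem_cons.mp hz with hz | hz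
                · subst hz
                  left
                  apply mem_keys_of_getD_pos
                  have hcard := comp_card_pos grid h w c y
                  have : col = c := by rw [← hgz, hgp]
                  rw [this]
                  omega
                · exact Or.inr ⟨hne, z, hz, hgz⟩
        · -- fresh cell: grow the component by dilation to a fixpoint
          have hpF : p ∈ cellsF grid h w c := (mem_cellsF grid h w c p).mpr ⟨hp, rfl⟩
          obtain ⟨hRmem, hRnd, hRlen⟩ := fixLoop_run grid h w c p hpF
          set R : PySem.Set (Int × Int) := fixLoop grid h w c [p] with hRdef
          have hstep : stepB grid h w (vis, d) p =
              (if (R.length : Int) > d.getD c 0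
               then (PySem.Set.union vis R, d.insert c (R.length : Int))
               else (PySem.Set.union vis R, d)) := by
            unfold stepB
            rw [if_pos ⟨hc0, hvp⟩]
          set n : Int := ((comp grid h w c p).card : Int) with hn
          have hsub : ∀ x ∈ vis, x ∈ PySem.Set.union vis R :=
            fun x hx => (PySem.Set.mem_union vis R x).mpr (Or.inl hx)
          have hcompsub : ∀ x ∈ comp grid h w c p, x ∈ PySem.Set.union vis R :=
            fun x hx => (PySem.Set.mem_union vis R x).mpr (Or.inr ((hRmem x).mpr hx))
          have hmem' : ∀ x, x ∈ PySem.Set.union vis R ↔ x ∈ vis ∨ x ∈ comp grid h w c p := by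
            intro x
            rw [PySem.Set.mem_union]
            exact or_congr Iff.rfl (hRmem x)
          have hnd' : (PySem.Set.union vis R).Nodup := PySem.Set.nodup_union vis R hvnd
          rw [hstep, hRlen]
          by_cases hgt : n > d.getD c 0
          · rw [if_pos hgt]
            have hinv' : visInvB grid h w (PySem.Set.union vis R) (d.insert c n) := by
              intro x hx
              rcases (hmem' x).mp hx with hx1 | hx1
              · obtain ⟨col', y', hc0', hy'F, hxy', hy'cl, hle'⟩ := hinv x hx1
                refine ⟨col', y', hc0', hy'F, hxy', fun z hz => hsub z (hy'cl z hz), ?_⟩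
                by_cases hcc : col' = c
                · subst hcc
                  rw [PySem.Dict.getD_insert_self]
                  omega
                · rw [PySem.Dict.getD_insert_of_ne d n 0 hcc]
                  exact hle'
              · refine ⟨c, p, hc0, hpF, hx1, hcompsub, ?_⟩
                rw [PySem.Dict.getD_insert_self]
            obtain ⟨ih1, ih2⟩ := ih _ (d.insert c n) hLB' hnd' hinv'
            constructor
            · intro col hcol
              by_cases hcc : col = c
              · rw [hcc, ih1 c (by rw [hcc] at hcol; exact hcol), PySem.Dict.getD_insert_self,
                  sizeMax_cons_pos grid h w c p L _ rfl]
                congr 1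
                omega
              · rw [ih1 col hcol, PySem.Dict.getD_insert_of_ne d n 0 hcc,
                  sizeMax_cons_neg grid h w col p L _ (fun hh => hcc (by rw [← hh]))]
            · intro col
              rw [ih2 col, PySem.Dict.mem_keys_insert]
              constructor
              · rintro ((hk | hk) | ⟨hne, z, hz, hgz⟩)
                · subst hk; exact Or.inr ⟨hc0, p, by simp, rfl⟩
                · exact Or.inl hk
                · exact Or.inr ⟨hne, z, by simp [hz], hgz⟩
              · rintro (hk | ⟨hne, z, hz, hgz⟩)
                · exact Or.inl (Or.inr hk)
                · rcases List.mem_cons.mp hz with hz | hz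
                  · subst hz; exact Or.inl (Or.inl (by rw [← hgz]))
                  · exact Or.inr ⟨hne, z, hz, hgz⟩
          · rw [if_neg hgt]
            have hinv' : visInvB grid h w (PySem.Set.union vis R) d := by
              intro x hx
              rcases (hmem' x).mp hx with hx1 | hx1
              · obtain ⟨col', y', hc0', hy'F, hxy', hy'cl, hle'⟩ := hinv x hx1
                exact ⟨col', y', hc0', hy'F, hxy', fun z hz => hsub z (hy'cl z hz), hle'⟩
              · exact ⟨c, p, hc0, hpF, hx1, hcompsub, by omega⟩
            obtain ⟨ih1, ih2⟩ := ih _ d hLB' hnd' hinv'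
            constructor
            · intro col hcol
              by_cases hcc : col = c
              · rw [hcc, ih1 c (by rw [hcc] at hcol; exact hcol),
                  sizeMax_cons_pos grid h w c p L _ rfl]
                congr 1
                omega
              · rw [ih1 col hcol,
                  sizeMax_cons_neg grid h w col p L _ (fun hh => hcc (by rw [← hh]))]
            · intro col
              rw [ih2 col]
              constructor
              · rintro (hk | ⟨hne, z, hz, hgz⟩)
                · exact Or.inl hk
                · exact Or.inr ⟨hne, z, by simp [hz], hgz⟩
              · rintro (hk | ⟨hne, z, hz, hgz⟩)
                · exact Or.inl hk
                · rcases List.mem_cons.mp hz with hz | hz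
                  · left
                    have hcolc : col = c := by rw [hcdef, ← hz, hgz]
                    rw [hcolc]
                    apply mem_keys_of_getD_pos
                    have := comp_card_pos grid h w c p
                    omega
                  · exact Or.inr ⟨hne, z, hz, hgz⟩


lemma nested_foldl {σ : Type} (h w : Int) (f : σ → (Int × Int) → σ) (init : σ) :
    (PySem.List.pyRange 0 h 1).foldl (fun st r =>
      (PySem.List.pyRange 0 w 1).foldl (fun st c => f st (r, c)) st) init
    = (allCells h w).foldl f init := by
  simp [allCells, List.foldl_flatMap, List.foldl_map]

lemma le_sizeMax_of_mem (grid : List (List Int)) (h w col : Int) :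
    ∀ (L : List (Int × Int)) (bs : Int) (p : Int × Int), p ∈ L →
    gcell grid p.1 p.2 = col →
    ((comp grid h w col p).card : Int) ≤ sizeMax grid h w col L bs := by
  intro L
  induction L with
  | nil => intro bs p hp; simp at hp
  | cons q L ih =>
      intro bs p hp hcp
      rcases List.mem_cons.mp hp with hp | hp
      · subst hp
        rw [sizeMax_cons_pos grid h w col p L bs hcp]
        exact le_trans (le_max_right _ _) (bs_le_sizeMax grid h w col L _)
      · by_cases hq : gcell grid q.1 q.2 = col
        · rw [sizeMax_cons_pos grid h w col q L bs hq]
          exact ih _ p hp hcp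
        · rw [sizeMax_cons_neg grid h w col q L bs hq]
          exact ih _ p hp hcp

lemma colorScan_eq (grid : List (List Int)) (h w col : Int) (b : Option Int) (bs : Int) :
    colorScan grid h w (b, bs) col
      = ((if sizeMax grid h w col (allCells h w) bs > bs then some col else b),
         sizeMax grid h w col (allCells h w) bs) := by
  unfold colorScan
  rw [nested_foldl h w (stepA grid h w col) ((PySem.Set.empty : PySem.Set (Int × Int)), (b, bs))]
  obtain ⟨h1, h2⟩ := scanA_go grid h w col (allCells h w)
    (PySem.Set.empty : PySem.Set (Int × Int)) b bs (fun x hx => hx)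
    (by simp [PySem.Set.empty])
    (by intro x hx; simp [PySem.Set.empty] at hx)
  rw [Prod.ext_iff]
  exact ⟨h2, h1⟩

lemma mem_colorSeq (grid : List (List Int)) (h w col : Int) :
    col ∈ colorSeq grid h w
      ↔ col ≠ 0 ∧ ∃ p ∈ allCells h w, gcell grid p.1 p.2 = col := by
  rw [colorSeq]
  simp only [List.mem_flatMap, List.mem_filterMap]
  constructor
  · rintro ⟨r, hr, c, hc, hite⟩
    split_ifs at hite with hg
    simp at hite
    subst hite
    refine ⟨hg, (r, c), ?_, rfl⟩
    rw [mem_allCells]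
    rw [PySem.List.mem_pyRange_one] at hr hc
    exact ⟨hr.1, hr.2, hc.1, hc.2⟩
  · rintro ⟨hne, p, hp, hgp⟩
    rw [mem_allCells] at hp
    refine ⟨p.1, ?_, p.2, ?_, ?_⟩
    · rw [PySem.List.mem_pyRange_one]; exact ⟨hp.1, hp.2.1⟩
    · rw [PySem.List.mem_pyRange_one]; exact ⟨hp.2.2.1, hp.2.2.2⟩
    · rw [if_pos (by rw [hgp]; exact hne), hgp]

-- ===== correctness of the hand-ported CPython set: it holds exactly its inputs =====

lemma getD_some_mem {l : List (Option Int)} {j : Nat} {x : Int}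
    (hg : l.getD j none = some x) : some x ∈ l := by
  by_cases hj : j < l.length
  · rw [List.getD_eq_getElem?_getD, List.getElem?_eq_getElem hj] at hg
    simp at hg
    exact hg ▸ List.getElem_mem hj
  · rw [List.getD_eq_default l none (by omega)] at hg
    simp at hg

lemma some_mem_set_of_free {l : List (Option Int)} {j : Nat}
    (hfree : l.getD j none = none) {z : Int} (v : Option Int) (hz : some z ∈ l) :
    some z ∈ l.set j v := by
  obtain ⟨k, hk, hzk⟩ := List.mem_iff_getElem.mp hz
  have hkj : j ≠ k := by
    intro he
    subst he
    rw [List.getD_eq_getElem?_getD, List.getElem?_eq_getElem hk, hzk] at hfree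
    simp at hfree
  refine List.mem_iff_getElem.mpr ⟨k, by rw [List.length_set]; exact hk, ?_⟩
  rw [List.getElem_set_ne hkj]
  exact hzk

lemma scanSlots_spec (table : List (Option Int)) (key : Int) :
    ∀ (n i : Nat) (b : Bool) (j : Nat), scanSlots table key i n = some (b, j) →
      i ≤ j ∧ j < i + n ∧ (b = true → table.getD j none = none) ∧
      (b = false → table.getD j none = some key) := by
  intro n
  induction n with
  | zero => intro i b j hsc; simp [scanSlots] at hsc
  | succ n ih =>
      intro i b j hsc
      cases hget : table.getD i none with
      | none =>
          simp only [scanSlots, hget] at hsc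
          obtain ⟨hb, hj⟩ := Prod.mk.injEq .. ▸ (Option.some.injEq _ _ ▸ hsc)
          refine ⟨by omega, by omega, fun _ => by rw [← hj]; exact hget, fun hf => ?_⟩
          rw [← hb] at hf
          simp at hf
      | some x =>
          by_cases hxk : x = key
          · simp only [scanSlots, hget, hxk] at hsc
            obtain ⟨hb, hj⟩ := Prod.mk.injEq .. ▸ (Option.some.injEq _ _ ▸ hsc)
            refine ⟨by omega, by omega, fun ht => ?_, fun _ => by rw [← hj, ← hxk]; exact hget⟩
            rw [← hb] at ht
            simp at ht
          · simp only [scanSlots, hget, if_neg hxk] at hsc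
            obtain ⟨h1, h2, h3, h4⟩ := ih (i + 1) b j hsc
            exact ⟨by omega, by omega, h3, h4⟩

lemma addLoop_len (key : Int) (table : List (Option Int)) (mask : Nat) :
    ∀ (fuel i perturb : Nat),
      table.length ≤ (addLoop key table mask i perturb fuel).length := by
  intro fuel
  induction fuel with
  | zero => intro i perturb; simp [addLoop]
  | succ fuel ih =>
      intro i perturb
      rw [addLoop]
      cases hsc : scanSlots table key i ((if i + 9 ≤ mask then 9 else 0) + 1) with
      | none => exact ih _ _
      | some bj =>
          obtain ⟨b, j⟩ := bj
          cases b
          · simp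
          · simp [List.length_set]

lemma addLoop_preserves (key : Int) (table : List (Option Int)) (mask : Nat) :
    ∀ (fuel i perturb : Nat) (z : Int), some z ∈ table →
      some z ∈ addLoop key table mask i perturb fuel := by
  intro fuel
  induction fuel with
  | zero => intro i perturb z hz; rw [addLoop]; exact List.mem_append_left _ hz
  | succ fuel ih =>
      intro i perturb z hz
      rw [addLoop]
      cases hsc : scanSlots table key i ((if i + 9 ≤ mask then 9 else 0) + 1) with
      | none => exact ih _ _ z hz
      | some bj =>
          obtain ⟨b, j⟩ := bj
          cases b
          · exact hz
          · have hfree := (scanSlots_spec table key _ i true j hsc).2.2.1 rfl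
            exact some_mem_set_of_free hfree _ hz

lemma addLoop_mem (key : Int) (table : List (Option Int)) (mask : Nat)
    (hlen : mask + 1 ≤ table.length) :
    ∀ (fuel i perturb : Nat), i ≤ mask →
      some key ∈ addLoop key table mask i perturb fuel ∨
        (addLoop key table mask i perturb fuel = table ∧ some key ∈ table) := by
  intro fuel
  induction fuel with
  | zero => intro i perturb _; rw [addLoop]; exact Or.inl (by simp)
  | succ fuel ih =>
      intro i perturb hi
      rw [addLoop]
      cases hsc : scanSlots table key i ((if i + 9 ≤ mask then 9 else 0) + 1) with
      | none =>
          exact ih _ _ (by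
            have := Nat.mod_lt ((i * 5 + 1 + perturb >>> 5)) (show 0 < mask + 1 by omega)
            omega)
      | some bj =>
          obtain ⟨b, j⟩ := bj
          obtain ⟨hij, hjlt, hfree, hfound⟩ := scanSlots_spec table key _ i b j hsc
          cases b
          · exact Or.inr ⟨rfl, getD_some_mem (hfound rfl)⟩
          · left
            have hjm : j < table.length := by
              by_cases hp : i + 9 ≤ mask
              · rw [if_pos hp] at hjlt; omega
              · rw [if_neg hp] at hjlt; omega
            refine List.mem_iff_getElem.mpr ⟨j, by rw [List.length_set]; exact hjm, ?_⟩
            exact List.getElem_set_self (by rw [List.length_set]; exact hjm)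

lemma addLoop_subset (key : Int) (table : List (Option Int)) (mask : Nat) :
    ∀ (fuel i perturb : Nat) (z : Int),
      some z ∈ addLoop key table mask i perturb fuel → some z ∈ table ∨ z = key := by
  intro fuel
  induction fuel with
  | zero =>
      intro i perturb z hz
      rw [addLoop] at hz
      rcases List.mem_append.mp hz with hz | hz
      · exact Or.inl hz
      · simp at hz; omega
  | succ fuel ih =>
      intro i perturb z hz
      rw [addLoop] at hz
      cases hsc : scanSlots table key i ((if i + 9 ≤ mask then 9 else 0) + 1) with
      | none => rw [hsc] at hz; exact ih _ _ z hz
      | some bj =>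
          obtain ⟨b, j⟩ := bj
          rw [hsc] at hz
          cases b
          · exact Or.inl hz
          · simp only [] at hz
            rcases List.mem_or_eq_of_mem_set hz with hz | hz
            · exact Or.inl hz
            · simp at hz; omega

lemma foldIns_spec (ns : Nat) (hns : 0 < ns) :
    ∀ (ks : List Int) (tb : List (Option Int)), ns ≤ tb.length →
      ns ≤ (ks.foldl (fun tb k =>
        addLoop k tb (ns - 1) (uhash k % ns) (uhash k) (ns * ns + 64)) tb).length ∧
      (∀ z, some z ∈ ks.foldl (fun tb k =>
          addLoop k tb (ns - 1) (uhash k % ns) (uhash k) (ns * ns + 64)) tb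
        ↔ some z ∈ tb ∨ z ∈ ks) := by
  intro ks
  induction ks with
  | nil => intro tb htb; exact ⟨htb, fun z => by simp⟩
  | cons k ks ih =>
      intro tb htb
      rw [List.foldl_cons]
      have hlen : (ns - 1) + 1 ≤ tb.length := by omega
      have hi : uhash k % ns ≤ ns - 1 := by
        have := Nat.mod_lt (uhash k) hns
        omega
      have hmemk : some k ∈ addLoop k tb (ns - 1) (uhash k % ns) (uhash k) (ns * ns + 64) := by
        rcases addLoop_mem k tb (ns - 1) hlen (ns * ns + 64) (uhash k % ns) (uhash k) hi with
          hm | ⟨he, hm⟩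
        · exact hm
        · rw [he]; exact hm
      obtain ⟨ih1, ih2⟩ := ih (addLoop k tb (ns - 1) (uhash k % ns) (uhash k) (ns * ns + 64))
        (le_trans htb (addLoop_len k tb (ns - 1) _ _ _))
      refine ⟨ih1, fun z => ?_⟩
      rw [ih2 z]
      constructor
      · rintro (hz | hz)
        · rcases addLoop_subset k tb (ns - 1) _ _ _ z hz with hz | hz
          · exact Or.inl hz
          · subst hz; exact Or.inr (by simp)
        · exact Or.inr (by simp [hz])
      · rintro (hz | hz)
        · exact Or.inl (addLoop_preserves k tb (ns - 1) _ _ _ z hz)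
        · rcases List.mem_cons.mp hz with hz | hz
          · subst hz; exact Or.inl hmemk
          · exact Or.inr hz

lemma setAddPy_spec (st : List (Option Int) × Nat) (x : Int) (h0 : 0 < st.1.length) :
    0 < (setAddPy st x).1.length ∧
      (∀ z, some z ∈ (setAddPy st x).1 ↔ some z ∈ st.1 ∨ z = x) := by
  have hlen : (st.1.length - 1) + 1 ≤ st.1.length := by omega
  have hi : uhash x % st.1.length ≤ st.1.length - 1 := by
    have := Nat.mod_lt (uhash x) h0
    omega
  have hA := addLoop_mem x st.1 (st.1.length - 1) hlen
    (st.1.length * st.1.length + 64) (uhash x % st.1.length) (uhash x) hi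
  have hB := fun z hz => addLoop_preserves x st.1 (st.1.length - 1)
    (st.1.length * st.1.length + 64) (uhash x % st.1.length) (uhash x) z hz
  have hC := fun z hz => addLoop_subset x st.1 (st.1.length - 1)
    (st.1.length * st.1.length + 64) (uhash x % st.1.length) (uhash x) z hz
  have hL := addLoop_len x st.1 (st.1.length - 1)
    (st.1.length * st.1.length + 64) (uhash x % st.1.length) (uhash x)
  rw [setAddPy]
  simp only []
  set ns := growSize 8 (if st.2 + 1 > 50000 then (st.2 + 1) * 2 else (st.2 + 1) * 4) 64
    with hnsdef
  split_ifs with heq hres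
  · refine ⟨h0, fun z => ?_⟩
    constructor
    · intro hz; exact Or.inl hz
    · rintro (hz | hz)
      · exact hz
      · subst hz
        rcases hA with hm | ⟨_, hm⟩
        · rw [heq] at hm; exact hm
        · exact hm
  · -- resize
    have hns : 0 < ns := by
      rw [hnsdef]
      have hmono : ∀ (f s m : Nat), s ≤ growSize s m f := by
        intro f
        induction f with
        | zero => intro s m; simp [growSize]
        | succ f ihf =>
            intro s m
            rw [growSize]
            split_ifs
            · exact le_trans (by omega) (ihf (s * 2) m)
            · exact le_refl s
      have := hmono 64 8 (if st.2 + 1 > 50000 then (st.2 + 1) * 2 else (st.2 + 1) * 4)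
      omega
    obtain ⟨hf1, hf2⟩ := foldIns_spec _ hns
      ((addLoop x st.1 (st.1.length - 1) (uhash x % st.1.length) (uhash x)
        (st.1.length * st.1.length + 64)).filterMap id)
      (List.replicate _ none) (by rw [List.length_replicate])
    refine ⟨lt_of_lt_of_le hns hf1, fun z => ?_⟩
    rw [hf2 z]
    have hrep : ¬ some z ∈ List.replicate ns (none : Option Int) := by
      intro hz
      rw [List.mem_replicate] at hz
      simp at hz
    have hfm : ∀ w : Int, w ∈ (addLoop x st.1 (st.1.length - 1) (uhash x % st.1.length)
        (uhash x) (st.1.length * st.1.length + 64)).filterMap id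
        ↔ some w ∈ addLoop x st.1 (st.1.length - 1) (uhash x % st.1.length)
          (uhash x) (st.1.length * st.1.length + 64) := by
      intro w
      rw [List.mem_filterMap]
      constructor
      · rintro ⟨a, ha, haw⟩; simp at haw; rw [← haw]; exact ha
      · intro hw; exact ⟨some w, hw, rfl⟩
    constructor
    · rintro (hz | hz)
      · exact absurd hz hrep
      · rw [hfm z] at hz
        exact hC z hz
    · rintro (hz | hz)
      · exact Or.inr ((hfm z).mpr (hB z hz))
      · subst hz
        refine Or.inr ((hfm z).mpr ?_)
        rcases hA with hm | ⟨he, hm⟩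
        · exact hm
        · exact absurd he heq
  · refine ⟨lt_of_lt_of_le h0 hL, fun z => ?_⟩
    constructor
    · intro hz; exact hC z hz
    · rintro (hz | hz)
      · exact hB z hz
      · subst hz
        rcases hA with hm | ⟨he, hm⟩
        · exact hm
        · exact absurd he heq

lemma mem_pySetOrder (xs : List Int) (x : Int) : x ∈ pySetOrder xs ↔ x ∈ xs := by
  have main : ∀ (ys : List Int) (st : List (Option Int) × Nat), 0 < st.1.length →
      ∀ z, some z ∈ (ys.foldl setAddPy st).1 ↔ some z ∈ st.1 ∨ z ∈ ys := by
    intro ys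
    induction ys with
    | nil => intro st h0 z; simp
    | cons y ys ih =>
        intro st h0 z
        rw [List.foldl_cons]
        obtain ⟨hlen', hmem'⟩ := setAddPy_spec st y h0
        rw [ih (setAddPy st y) hlen' z, hmem' z]
        constructor
        · rintro ((hz | hz) | hz)
          · exact Or.inl hz
          · exact Or.inr (by simp [hz])
          · exact Or.inr (by simp [hz])
        · rintro (hz | hz)
          · exact Or.inl (Or.inl hz)
          · rcases List.mem_cons.mp hz with hz | hz
            · exact Or.inl (Or.inr hz)
            · exact Or.inr hz
  rw [pySetOrder, List.mem_filterMap]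
  constructor
  · rintro ⟨a, ha, hax⟩
    simp at hax
    rw [hax] at ha
    have := (main xs (List.replicate 8 none, 0) (by simp) x).mp ha
    rcases this with hz | hz
    · rw [List.mem_replicate] at hz
      simp at hz
    · exact hz
  · intro hx
    refine ⟨some x, ?_, rfl⟩
    exact (main xs (List.replicate 8 none, 0) (by simp) x).mpr (Or.inr hx)

-- ===== A's running argmax over the colour list = Python max(colors, key=…) =====

lemma foldl_congr_keyed {α β : Type} (F G : β → α → β) (Inv : β → Prop) :
    ∀ (L : List α) (acc : β), Inv acc →
      (∀ b x, Inv b → x ∈ L → F b x = G b x ∧ Inv (F b x)) →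
      L.foldl F acc = L.foldl G acc := by
  intro L
  induction L with
  | nil => intros; rfl
  | cons x L ih =>
      intro acc hInv hstep
      rw [List.foldl_cons, List.foldl_cons]
      obtain ⟨heq, hinv'⟩ := hstep acc x hInv (by simp)
      rw [heq]
      exact ih (G acc x) (heq ▸ hinv') (fun b y hb hy => hstep b y hb (by simp [hy]))

lemma maxq_congr (f g : Int → Int) (L : List Int) (hfg : ∀ x ∈ L, f x = g x) :
    PySem.List.max? L f = PySem.List.max? L g := by
  simp only [PySem.List.max?]
  refine foldl_congr_keyed _ _ (fun acc => ∀ a, acc = some a → f a = g a) L none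
    (by simp) ?_
  intro b x hInv hx
  have hx' : f x = g x := hfg x hx
  cases b with
  | none =>
      refine ⟨rfl, ?_⟩
      intro a ha
      simp only [] at ha
      simp at ha
      rw [← ha]
      exact hx'
  | some mm =>
      have hmm : f mm = g mm := hInv mm rfl
      constructor
      · simp only []
        rw [hmm, hx']
      · intro a ha
        simp only [] at ha
        split_ifs at ha <;> (simp at ha; rw [← ha])
        · exact hx'
        · exact hmm

lemma foldA_go (grid : List (List Int)) (h w : Int)
    (M : Option Int → Int → Option Int)
    (hMnone : ∀ x, M none x = some x)
    (hMsome : ∀ mm x, M (some mm) x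
      = if sizeMax grid h w mm (allCells h w) 0 < sizeMax grid h w x (allCells h w) 0
        then some x else some mm) :
    ∀ (L : List Int),
    (∀ c ∈ L, 0 < sizeMax grid h w c (allCells h w) 0) →
    ∀ (acc b : Option Int) (bs : Int),
    ((acc = none ∧ b = none ∧ bs = 0) ∨
      (∃ mm, acc = some mm ∧ b = some mm ∧
        bs = sizeMax grid h w mm (allCells h w) 0 ∧ 0 < bs)) →
    L.foldl (colorScan grid h w) (b, bs)
      = (match L.foldl M acc with
         | none => (none, (0 : Int))
         | some mm => (some mm, sizeMax grid h w mm (allCells h w) 0)) := by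
  intro L
  induction L with
  | nil =>
      intro _ acc b bs hrel
      rcases hrel with ⟨ha, hb, hbs⟩ | ⟨mm, ha, hb, hbs, _⟩
      · rw [ha, hb, hbs]; rfl
      · rw [ha, hb, hbs]; rfl
  | cons c L ih =>
      intro hpos acc b bs hrel
      have hposc : 0 < sizeMax grid h w c (allCells h w) 0 := hpos c (by simp)
      have hpos' : ∀ x ∈ L, 0 < sizeMax grid h w x (allCells h w) 0 :=
        fun x hx => hpos x (by simp [hx])
      have hbs0 : 0 ≤ bs := by
        rcases hrel with ⟨_, _, hbs⟩ | ⟨mm, _, _, _, hp⟩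
        · omega
        · omega
      have hkey : sizeMax grid h w c (allCells h w) bs
          = max bs (sizeMax grid h w c (allCells h w) 0) := by
        calc sizeMax grid h w c (allCells h w) bs
            = sizeMax grid h w c (allCells h w) (max bs 0) := by
              rw [max_eq_left hbs0]
          _ = max bs (sizeMax grid h w c (allCells h w) 0) := sizeMax_init grid h w c _ bs 0
      rw [List.foldl_cons, List.foldl_cons, colorScan_eq, hkey]
      rcases hrel with ⟨ha, hb, hbs⟩ | ⟨mm, ha, hb, hbs, hp⟩
      · subst ha; subst hb; subst hbs
        rw [max_eq_right (by omega), if_pos (by omega), hMnone]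
        exact ih hpos' (some c) (some c) _ (Or.inr ⟨c, rfl, rfl, rfl, hposc⟩)
      · subst ha; subst hb; subst hbs
        rw [hMsome]
        by_cases hlt : sizeMax grid h w mm (allCells h w) 0
            < sizeMax grid h w c (allCells h w) 0
        · have hacc : ((if max (sizeMax grid h w mm (allCells h w) 0)
                (sizeMax grid h w c (allCells h w) 0) > sizeMax grid h w mm (allCells h w) 0
              then some c else some mm),
              max (sizeMax grid h w mm (allCells h w) 0)
                (sizeMax grid h w c (allCells h w) 0))
              = ((some c : Option Int), sizeMax grid h w c (allCells h w) 0) := by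
            rw [max_eq_right (by omega : sizeMax grid h w mm (allCells h w) 0
              ≤ sizeMax grid h w c (allCells h w) 0)]
            rw [if_pos (by omega)]
          rw [hacc, if_pos hlt]
          exact ih hpos' (some c) (some c) _ (Or.inr ⟨c, rfl, rfl, rfl, hposc⟩)
        · have hacc : ((if max (sizeMax grid h w mm (allCells h w) 0)
                (sizeMax grid h w c (allCells h w) 0) > sizeMax grid h w mm (allCells h w) 0
              then some c else some mm),
              max (sizeMax grid h w mm (allCells h w) 0)
                (sizeMax grid h w c (allCells h w) 0))
              = ((some mm : Option Int), sizeMax grid h w mm (allCells h w) 0) := by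
            rw [max_eq_left (by omega : sizeMax grid h w c (allCells h w) 0
              ≤ sizeMax grid h w mm (allCells h w) 0)]
            rw [if_neg (by omega)]
          rw [hacc, if_neg hlt]
          exact ih hpos' (some mm) (some mm) _ (Or.inr ⟨mm, rfl, rfl, rfl, hp⟩)

lemma foldA_max (grid : List (List Int)) (h w : Int) (L : List Int)
    (hpos : ∀ c ∈ L, 0 < sizeMax grid h w c (allCells h w) 0) (m : Int)
    {M : Option Int → Int → Option Int}
    (hm : L.foldl M none = some m)
    (hMnone : ∀ x, M none x = some x)
    (hMsome : ∀ mm x, M (some mm) x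
      = if sizeMax grid h w mm (allCells h w) 0 < sizeMax grid h w x (allCells h w) 0
        then some x else some mm) :
    L.foldl (colorScan grid h w) (none, 0)
      = (some m, sizeMax grid h w m (allCells h w) 0) := by
  have hgo := foldA_go grid h w M hMnone hMsome L hpos none none 0 (Or.inl ⟨rfl, rfl, rfl⟩)
  rw [hm] at hgo
  exact hgo

lemma head_le_of_pairwise (l : List Int) (hl : l.Pairwise (· < ·)) (a : Int) (t : List Int)
    (hcons : l = a :: t) : ∀ y ∈ l, a ≤ y := by
  subst hcons
  intro y hy
  rcases List.mem_cons.mp hy with hy | hy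
  · omega
  · exact le_of_lt ((List.pairwise_cons.mp hl).1 y hy)

lemma le_getLast_of_pairwise :
    ∀ (l : List Int), l.Pairwise (· < ·) → ∀ (hne : l ≠ []), ∀ y ∈ l, y ≤ l.getLast hne := by
  intro l
  induction l with
  | nil => intro _ hne; exact absurd rfl hne
  | cons a t ih =>
      intro hl hne y hy
      cases t with
      | nil =>
          simp at hy
          simp [hy]
      | cons b u =>
          rw [List.getLast_cons (by simp)]
          rcases List.mem_cons.mp hy with hy | hy
          · subst hy
            have hb : b :: u ≠ [] := by simp
            have : y < b := (List.pairwise_cons.mp hl).1 b (by simp)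
            have hbl : b ≤ (b :: u).getLast hb :=
              ih (List.pairwise_cons.mp hl).2 hb b (by simp)
            omega
          · exact ih (List.pairwise_cons.mp hl).2 (by simp) y hy

lemma minD_eq_head (l1 l2 : List Int) (hmem : ∀ x, x ∈ l1 ↔ x ∈ l2)
    (hpw : l2.Pairwise (· < ·)) (hne : l2 ≠ []) :
    (PySem.List.min? l1 (fun x => x)).getD 0 = PySem.List.pyGetD l2 0 0 := by
  obtain ⟨a, t, hcons⟩ := List.exists_cons_of_ne_nil hne
  have hal1 : a ∈ l1 := (hmem a).mpr (by rw [hcons]; simp)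
  have hl1ne : l1 ≠ [] := fun hn => by rw [hn] at hal1; simp at hal1
  cases hmin : PySem.List.min? l1 (fun x => x) with
  | none => exact absurd ((PySem.List.min?_eq_none_iff l1 (fun x => x)).mp hmin) hl1ne
  | some m =>
      have hm2 : m ∈ l2 := (hmem m).mp (PySem.List.min?_mem hmin)
      have h1 : a ≤ m := head_le_of_pairwise l2 hpw a t hcons m hm2
      have h2 : m ≤ a := PySem.List.min?_isMin hmin a hal1
      rw [hcons, PySem.List.pyGetD_zero_cons]
      simp
      omega

lemma maxD_eq_last (l1 l2 : List Int) (hmem : ∀ x, x ∈ l1 ↔ x ∈ l2)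
    (hpw : l2.Pairwise (· < ·)) (hne : l2 ≠ []) :
    (PySem.List.max? l1 (fun x => x)).getD 0 = PySem.List.pyGetD l2 (-1) 0 := by
  have hlast : l2.getLast hne ∈ l2 := List.getLast_mem hne
  have hal1 : l2.getLast hne ∈ l1 := (hmem _).mpr hlast
  have hl1ne : l1 ≠ [] := fun hn => by rw [hn] at hal1; simp at hal1
  cases hmax : PySem.List.max? l1 (fun x => x) with
  | none => exact absurd ((PySem.List.max?_eq_none_iff l1 (fun x => x)).mp hmax) hl1ne
  | some m =>
      have hm2 : m ∈ l2 := (hmem m).mp (PySem.List.max?_mem hmax)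
      have h1 : m ≤ l2.getLast hne := le_getLast_of_pairwise l2 hpw hne m hm2
      have h2 : l2.getLast hne ≤ m := PySem.List.max?_isMax hmax _ hal1
      rw [PySem.List.pyGetD_neg_one l2 0 hne]
      simp
      omega

lemma all_flat_pairs (a b : Int) (f : Int × Int → Bool) :
    ((PySem.List.pyRange 0 a 1).flatMap (fun dr =>
      (PySem.List.pyRange 0 b 1).map (fun dc => (dr, dc)))).all f
    = (PySem.List.pyRange 0 a 1).all (fun dr =>
        (PySem.List.pyRange 0 b 1).all (fun dc => f (dr, dc))) := by
  simp [List.all_flatMap, List.all_map]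
  rfl

lemma pyRange3 : PySem.List.pyRange 0 3 1 = [0, 1, 2] := by decide

lemma rowFold (G : Int → Bool) (v : Int) :
    List.foldl (fun row sc => if G sc then PySem.List.pySetD row sc v else row)
      [0, 0, 0] [0, 1, 2]
    = [if G 0 then v else 0, if G 1 then v else 0, if G 2 then v else 0] := by
  rcases h0 : G 0 <;> rcases h1 : G 1 <;> rcases h2 : G 2 <;>
    simp [h0, h1, h2] <;> rfl

lemma innerFold0 (G : Int → Bool) (v : Int) (A B C : List Int) :
    List.foldl (fun result sc => if G sc then
        PySem.List.pySetD result 0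
          (PySem.List.pySetD (PySem.List.pyGetD result 0 []) sc v)
      else result) [A, B, C] [0, 1, 2]
    = [List.foldl (fun row sc => if G sc then PySem.List.pySetD row sc v else row) A [0, 1, 2],
       B, C] := by
  rcases h0 : G 0 <;> rcases h1 : G 1 <;> rcases h2 : G 2 <;>
    simp [h0, h1, h2] <;> rfl

lemma innerFold1 (G : Int → Bool) (v : Int) (A B C : List Int) :
    List.foldl (fun result sc => if G sc then
        PySem.List.pySetD result 1
          (PySem.List.pySetD (PySem.List.pyGetD result 1 []) sc v)
      else result) [A, B, C] [0, 1, 2]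
    = [A,
       List.foldl (fun row sc => if G sc then PySem.List.pySetD row sc v else row) B [0, 1, 2],
       C] := by
  rcases h0 : G 0 <;> rcases h1 : G 1 <;> rcases h2 : G 2 <;>
    simp [h0, h1, h2] <;> rfl

lemma innerFold2 (G : Int → Bool) (v : Int) (A B C : List Int) :
    List.foldl (fun result sc => if G sc then
        PySem.List.pySetD result 2
          (PySem.List.pySetD (PySem.List.pyGetD result 2 []) sc v)
      else result) [A, B, C] [0, 1, 2]
    = [A, B,
       List.foldl (fun row sc => if G sc then PySem.List.pySetD row sc v else row) C [0, 1, 2]] := by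
  rcases h0 : G 0 <;> rcases h1 : G 1 <;> rcases h2 : G 2 <;>
    simp [h0, h1, h2] <;> rfl

lemma assemble (F : Int → Int → Bool) (v : Int) :
    (PySem.List.pyRange 0 3 1).foldl (fun result sr =>
      (PySem.List.pyRange 0 3 1).foldl (fun result sc =>
        if F sr sc then
          PySem.List.pySetD result sr
            (PySem.List.pySetD (PySem.List.pyGetD result sr []) sc v)
        else result) result)
      [[0, 0, 0], [0, 0, 0], [0, 0, 0]]
    = (PySem.List.pyRange 0 3 1).map (fun sr =>
        (PySem.List.pyRange 0 3 1).map (fun sc => if F sr sc then v else 0)) := by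
  rw [pyRange3]
  have houter : ∀ (g : List (List Int) → Int → List (List Int)) (init : List (List Int)),
      List.foldl g init [0, 1, 2] = g (g (g init 0) 1) 2 := fun g init => rfl
  rw [houter]
  simp only [List.map_cons, List.map_nil]
  rw [innerFold0 (F 0) v, innerFold1 (F 1) v, innerFold2 (F 2) v,
    rowFold (F 0) v, rowFold (F 1) v, rowFold (F 2) v]


lemma memBC_fst (grid : List (List Int)) (h w v : Int) (x : Int) :
    (x ∈ (((PySem.List.pyRange 0 h 1).flatMap (fun r =>
      (PySem.List.pyRange 0 w 1).filterMap (fun c =>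
        if some (gcell grid r c) = some v then some (r, c) else none))).map (fun p => p.1)))
    ↔ x ∈ (PySem.List.pyRange 0 h 1).filter (fun r =>
        (PySem.List.pyRange 0 w 1).any (fun c => decide (gcell grid r c = v))) := by
  rw [List.mem_filter, List.mem_map]
  constructor
  · rintro ⟨p, hp, hpx⟩
    rw [List.mem_flatMap] at hp
    obtain ⟨r, hr, hpc⟩ := hp
    rw [List.mem_filterMap] at hpc
    obtain ⟨c, hc, hite⟩ := hpc
    split_ifs at hite with hg
    simp only [Option.some.injEq] at hite hg
    rw [← hite] at hpx
    simp at hpx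
    subst hpx
    exact ⟨hr, List.any_eq_true.mpr ⟨c, hc, by simp [hg]⟩⟩
  · rintro ⟨hx, hany⟩
    rw [List.any_eq_true] at hany
    obtain ⟨c, hc, hgc⟩ := hany
    simp only [decide_eq_true_eq] at hgc
    refine ⟨(x, c), ?_, rfl⟩
    rw [List.mem_flatMap]
    refine ⟨x, hx, ?_⟩
    rw [List.mem_filterMap]
    exact ⟨c, hc, by rw [if_pos (by rw [hgc])]⟩

lemma memBC_snd (grid : List (List Int)) (h w v : Int) (x : Int) :
    (x ∈ (((PySem.List.pyRange 0 h 1).flatMap (fun r =>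
      (PySem.List.pyRange 0 w 1).filterMap (fun c =>
        if some (gcell grid r c) = some v then some (r, c) else none))).map (fun p => p.2)))
    ↔ x ∈ (PySem.List.pyRange 0 w 1).filter (fun c =>
        (PySem.List.pyRange 0 h 1).any (fun r => decide (gcell grid r c = v))) := by
  rw [List.mem_filter, List.mem_map]
  constructor
  · rintro ⟨p, hp, hpx⟩
    rw [List.mem_flatMap] at hp
    obtain ⟨r, hr, hpc⟩ := hp
    rw [List.mem_filterMap] at hpc
    obtain ⟨c, hc, hite⟩ := hpc
    split_ifs at hite with hg
    simp only [Option.some.injEq] at hite hg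
    rw [← hite] at hpx
    simp at hpx
    subst hpx
    exact ⟨hc, List.any_eq_true.mpr ⟨r, hr, by simp [hg]⟩⟩
  · rintro ⟨hx, hany⟩
    rw [List.any_eq_true] at hany
    obtain ⟨r, hr, hgr⟩ := hany
    simp only [decide_eq_true_eq] at hgr
    refine ⟨(r, x), ?_, rfl⟩
    rw [List.mem_flatMap]
    refine ⟨r, hr, ?_⟩
    rw [List.mem_filterMap]
    exact ⟨x, hx, by rw [if_pos (by rw [hgr])]⟩

-- ===== VERDICT (by name: the statement is the Claim_ definition above) =====
theorem solve_5ad4f10b_spec : Claim_equal_solve_5ad4f10b := by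
  intro grid _ hpre
  unfold Spec_solve_5ad4f10b
  obtain ⟨hrows, h2c⟩ := hpre
  set H : Int := (grid.length : Int) with hH
  set W : Int := ((PySem.List.pyGetD grid 0 []).length : Int) with hW
  have hmemL : ∀ col, col ∈ colorsList grid H W
      ↔ (col ≠ 0 ∧ ∃ p ∈ allCells H W, gcell grid p.1 p.2 = col) := by
    intro col
    rw [colorsList, mem_pySetOrder, mem_colorSeq]
  have hpos : ∀ c ∈ colorsList grid H W, 0 < sizeMax grid H W c (allCells H W) 0 := by
    intro c hc
    obtain ⟨hc0, p, hp, hgp⟩ := (hmemL c).mp hc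
    have h1 := comp_card_pos grid H W c p
    have h2 := le_sizeMax_of_mem grid H W c (allCells H W) 0 p hp hgp
    omega
  have hLne : colorsList grid H W ≠ [] := by
    have hseq : ∃ c, c ∈ colorSeq grid H W := by
      rcases hdl : PySem.List.dedup (colorSeq grid H W) with _ | ⟨a, t⟩
      · rw [hdl] at h2c; simp at h2c
      · refine ⟨a, ?_⟩
        have ha : a ∈ PySem.List.dedup (colorSeq grid H W) := by rw [hdl]; simp
        rwa [PySem.List.mem_dedup] at ha
    obtain ⟨c, hc⟩ := hseq
    have : c ∈ colorsList grid H W := by rw [colorsList, mem_pySetOrder]; exact hc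
    exact List.ne_nil_of_mem this
  obtain ⟨m, hm⟩ : ∃ m, PySem.List.max? (colorsList grid H W)
      (fun c => sizeMax grid H W c (allCells H W) 0) = some m := by
    cases hmx : PySem.List.max? (colorsList grid H W)
        (fun c => sizeMax grid H W c (allCells H W) 0) with
    | none => exact absurd ((PySem.List.max?_eq_none_iff _ _).mp hmx) hLne
    | some m => exact ⟨m, rfl⟩
  have hmL : m ∈ colorsList grid H W := PySem.List.max?_mem hm
  obtain ⟨hm0, pm, hpm, hgpm⟩ := (hmemL m).mp hmL
  -- A's selection
  have hbb1 : ((colorsList grid H W).foldl (colorScan grid H W) (none, 0)).1 = some m := by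
    have hm' := hm
    simp only [PySem.List.max?] at hm'
    rw [foldA_max grid H W (colorsList grid H W) hpos m hm' (fun x => rfl) (fun mm x => rfl)]
  -- B's dict agrees with the key on every colour
  obtain ⟨hDval, _⟩ := scanB_go grid H W (allCells H W)
    (PySem.Set.empty : PySem.Set (Int × Int)) (PySem.Dict.empty : PySem.Dict Int Int)
    (fun x hx => hx) (by simp [PySem.Set.empty])
    (by intro x hx; simp [PySem.Set.empty] at hx)
  have hkeyD : ∀ c ∈ colorsList grid H W,
      ((allCells H W).foldl (stepB grid H W)
        (PySem.Set.empty, PySem.Dict.empty)).2.getD c 0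
      = sizeMax grid H W c (allCells H W) 0 := by
    intro c hc
    obtain ⟨hc0, _⟩ := (hmemL c).mp hc
    rw [hDval c hc0]
    rfl
  -- B's selection
  have hmaxB : PySem.List.max? (colorsList grid H W)
      (fun c => ((allCells H W).foldl (stepB grid H W)
        (PySem.Set.empty, PySem.Dict.empty)).2.getD c 0) = some m := by
    rw [maxq_congr _ (fun c => sizeMax grid H W c (allCells H W) 0) (colorsList grid H W) hkeyD]
    exact hm
  -- scatter: both sides filter the same list with the same predicate
  have hfun : (fun c : Int => decide (some c ≠ some m)) = (fun c : Int => decide (c ≠ m)) := by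
    funext c
    simp
  have hhead : ∀ (l : List Int), PySem.List.pyGetD l 0 0 = l.headD 0 := by
    intro l
    cases l with
    | nil => rfl
    | cons a t => rw [PySem.List.pyGetD_zero_cons]; rfl
  -- bounding box
  have hexB : ∃ p, p ∈ allCells H W ∧ gcell grid p.1 p.2 = m := ⟨pm, hpm, hgpm⟩
  have hBRpw : ((PySem.List.pyRange 0 H 1).filter (fun r =>
      (PySem.List.pyRange 0 W 1).any (fun c => decide (gcell grid r c = m)))).Pairwise (· < ·) :=
    (PySem.List.pairwise_lt_pyRange_one 0 H).filter _
  have hBCopw : ((PySem.List.pyRange 0 W 1).filter (fun c =>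
      (PySem.List.pyRange 0 H 1).any (fun r => decide (gcell grid r c = m)))).Pairwise (· < ·) :=
    (PySem.List.pairwise_lt_pyRange_one 0 W).filter _
  have hBRne : ((PySem.List.pyRange 0 H 1).filter (fun r =>
      (PySem.List.pyRange 0 W 1).any (fun c => decide (gcell grid r c = m)))) ≠ [] := by
    obtain ⟨p, hp, hgp⟩ := hexB
    rw [mem_allCells] at hp
    apply List.ne_nil_of_mem (a := p.1)
    rw [List.mem_filter]
    refine ⟨by rw [PySem.List.mem_pyRange_one]; exact ⟨hp.1, hp.2.1⟩, ?_⟩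
    rw [List.any_eq_true]
    exact ⟨p.2, by rw [PySem.List.mem_pyRange_one]; exact ⟨hp.2.2.1, hp.2.2.2⟩, by simp [hgp]⟩
  have hBCone : ((PySem.List.pyRange 0 W 1).filter (fun c =>
      (PySem.List.pyRange 0 H 1).any (fun r => decide (gcell grid r c = m)))) ≠ [] := by
    obtain ⟨p, hp, hgp⟩ := hexB
    rw [mem_allCells] at hp
    apply List.ne_nil_of_mem (a := p.2)
    rw [List.mem_filter]
    refine ⟨by rw [PySem.List.mem_pyRange_one]; exact ⟨hp.2.2.1, hp.2.2.2⟩, ?_⟩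
    rw [List.any_eq_true]
    exact ⟨p.1, by rw [PySem.List.mem_pyRange_one]; exact ⟨hp.1, hp.2.1⟩, by simp [hgp]⟩
  have hminr := minD_eq_head _ _ (memBC_fst grid H W m) hBRpw hBRne
  have hmaxr := maxD_eq_last _ _ (memBC_fst grid H W m) hBRpw hBRne
  have hminc := minD_eq_head _ _ (memBC_snd grid H W m) hBCopw hBCone
  have hmaxc := maxD_eq_last _ _ (memBC_snd grid H W m) hBCopw hBCone
  -- put the two sides together
  show solve_5ad4f10b grid = solve_5ad4f10b_alt grid
  unfold solve_5ad4f10b solve_5ad4f10b_alt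
  simp only [← hH, ← hW]
  rw [hbb1]
  rw [nested_foldl H W (stepB grid H W) (PySem.Set.empty, PySem.Dict.empty)]
  rw [hmaxB]
  simp only [Option.getD_some]
  rw [hfun, hhead ((colorsList grid H W).filter (fun c => decide (c ≠ m)))]
  rw [hminr, hmaxr, hminc, hmaxc]
  rw [assemble]
  simp only [all_flat_pairs, Option.some.injEq]
  rfl
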